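-- pv_equiv track=rewrite | github.com/Hamza-Mos/LeetCode | 2641-disconnect-path-in-a-binary-matrix-by-at-most-one-flip/disconnect-path-in-a-binary-matrix-by-at-most-one-flip.py | isPossibleToCutPath
-- ===== SOURCE A (Python) =====
-- from typing import List
--
-- def isPossibleToCutPath(grid: List[List[int]]) -> bool:
--     ROWS, COLS = len(grid), len(grid[0])
--
--     # Number of paths from (0, 0) -> (i, j)
--     dp1 = [[0] * COLS for i in range(ROWS)]
--     dp1[0][0] = 1
--     for i in range(ROWS):
--         for j in range(COLS):
--             if grid[i][j] == 1:
--                 if i > 0: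
--                     dp1[i][j] += dp1[i-1][j]
--                 if j > 0:
--                     dp1[i][j] += dp1[i][j-1]
--
--     # Number of paths from (i, j) -> (ROWS-1, COLS-1)
--     dp2 = [[0] * COLS for i in range(ROWS)]
--
--     dp2[ROWS-1][COLS-1] = 1
--     for i in range(ROWS-1, -1, -1):
--         for j in range(COLS-1, -1, -1):
--             if grid[i][j] == 1:
--                 if i < ROWS-1:
--                     dp2[i][j] += dp2[i+1][j]
--                 if j < COLS-1:
--                     dp2[i][j] += dp2[i][j+1]
--
--     # Number of paths from (0, 0) to (ROWS-1, COLS-1)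
--     target = dp1[ROWS-1][COLS-1]
--
--     # Check for a critical point (i, j)
--     for i in range(ROWS):
--         for j in range(COLS):
--             if (i != 0 or j != 0) and (i != ROWS-1 or j != COLS-1):
--                 if dp1[i][j] * dp2[i][j] == target:
--                     return True
--     return False
-- ===== SOURCE B (Python) =====
-- from typing import List
--
-- def isPossibleToCutPath(grid: List[List[int]]) -> bool:
--     R, C = len(grid), len(grid[0])
--
--     # cells reachable from the start, moving right/down through 1-cells
--     f = [[False] * C for _ in range(R)]
--     f[0][0] = True
--     for i in range(R):
--         for j in range(C):
--             if (i or j) and grid[i][j] == 1: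
--                 f[i][j] = (i > 0 and f[i-1][j]) or (j > 0 and f[i][j-1])
--
--     # cells from which the end is reachable, moving right/down through 1-cells
--     b = [[False] * C for _ in range(R)]
--     b[R-1][C-1] = True
--     for i in range(R-1, -1, -1):
--         for j in range(C-1, -1, -1):
--             if (i != R-1 or j != C-1) and grid[i][j] == 1:
--                 b[i][j] = (i < R-1 and b[i+1][j]) or (j < C-1 and b[i][j+1])
--
--     if not f[R-1][C-1]:
--         # the corners are already disconnected
--         return True
--
--     # a path exists: it can be cut iff some antidiagonal strictly between
--     # the two corners carries at most one cell lying on any path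
--     for d in range(1, R + C - 2):
--         cnt = 0
--         for i in range(R):
--             j = d - i
--             if 0 <= j < C and f[i][j] and b[i][j]:
--                 cnt += 1
--         if cnt <= 1:
--             return True
--     return False
-- ===== Notes on version B (the rewrite author's own statement) =====
-- stated objective: alternative
-- what changed: B replaces A's two big-integer path-counting DP tables and the dp1*dp2==target critical-cell scan by two boolean reachability tables: if the far corner is unreachable it returns True at once, otherwise it checks whether some interior antidiagonal carries at most one on-path cell; Pre_ excludes only ragged/empty grids, on which A raises IndexError.
-- intended difference: On grids of at least two cells whose bottom-right cell is not 1 while every non-corner cell is 1 (outside the problem's guarantee that the corner cells are 1), A returns False although the corners are already disconnected, while B returns True, the intended answer since no flip is even needed. — e.g. on isPossibleToCutPath([[1, 1], [1, 0]]): A returns false, B returns true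
import Mathlib
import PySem

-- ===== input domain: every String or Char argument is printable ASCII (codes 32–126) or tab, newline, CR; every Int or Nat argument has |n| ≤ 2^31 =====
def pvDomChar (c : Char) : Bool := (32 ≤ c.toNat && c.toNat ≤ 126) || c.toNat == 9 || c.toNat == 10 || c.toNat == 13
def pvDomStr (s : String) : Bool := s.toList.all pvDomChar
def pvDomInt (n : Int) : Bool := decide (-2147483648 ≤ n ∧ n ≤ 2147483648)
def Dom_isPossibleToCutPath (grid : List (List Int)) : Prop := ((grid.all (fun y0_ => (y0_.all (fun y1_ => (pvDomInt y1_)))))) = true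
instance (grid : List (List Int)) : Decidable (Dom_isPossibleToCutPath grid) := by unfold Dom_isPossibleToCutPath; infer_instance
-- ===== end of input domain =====

-- B replaces A's integer path-counting DP by boolean reachability: True at once when the
-- far corner is unreachable, else a per-antidiagonal on-path-cell count (objective: alternative);
-- on the D_ grids below (bottom-right cell not 1, all non-corner cells 1) B intentionally differs.

-- shared 2-D table helpers (Python's t[i][j] read / write; all uses are in range under Pre_)
def pvGet2 {α : Type} (dv : α) (t : List (List α)) (i j : Nat) : α := (t.getD i []).getD j dv
def pvSet2 {α : Type} (t : List (List α)) (i j : Nat) (v : α) : List (List α) :=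
  t.set i ((t.getD i []).set j v)

-- ===== PORT A =====
-- literal transliteration of A: two Int path-count DP tables built row-major /
-- reverse row-major, then a scan for a non-corner cell with dp1*dp2 == target.
-- Loop indices are the (nonnegative) values of Python's range, so Nat indexing is exact.
def isPossibleToCutPath (grid : List (List Int)) : Bool :=
  let ROWS := grid.length
  let COLS := (grid.getD 0 []).length
  -- dp1 = [[0]*COLS ...]; dp1[0][0] = 1
  let dp1 : List (List Int) := pvSet2 (List.replicate ROWS (List.replicate COLS (0:Int))) 0 0 1
  let dp1 := (List.range ROWS).foldl (fun t i => (List.range COLS).foldl (fun t j =>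
      if (grid.getD i []).getD j 0 == 1 then
        let t1 := if 0 < i then pvSet2 t i j (pvGet2 0 t i j + pvGet2 0 t (i-1) j) else t
        let t2 := if 0 < j then pvSet2 t1 i j (pvGet2 0 t1 i j + pvGet2 0 t1 i (j-1)) else t1
        t2
      else t) t) dp1
  -- dp2 = [[0]*COLS ...]; dp2[ROWS-1][COLS-1] = 1
  let dp2 : List (List Int) := pvSet2 (List.replicate ROWS (List.replicate COLS (0:Int))) (ROWS-1) (COLS-1) 1
  let dp2 := ((List.range ROWS).reverse).foldl (fun t i => ((List.range COLS).reverse).foldl (fun t j =>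
      if (grid.getD i []).getD j 0 == 1 then
        let t1 := if i < ROWS - 1 then pvSet2 t i j (pvGet2 0 t i j + pvGet2 0 t (i+1) j) else t
        let t2 := if j < COLS - 1 then pvSet2 t1 i j (pvGet2 0 t1 i j + pvGet2 0 t1 i (j+1)) else t1
        t2
      else t) t) dp2
  let target := pvGet2 0 dp1 (ROWS-1) (COLS-1)
  (List.range ROWS).any (fun i => (List.range COLS).any (fun j =>
    ((!(i == 0) || !(j == 0)) && (!(i == ROWS-1) || !(j == COLS-1))) &&
      (pvGet2 0 dp1 i j * pvGet2 0 dp2 i j == target)))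

-- ===== PORT B =====
-- literal transliteration of B (Source B): boolean forward/backward reachability tables with
-- the corner cells preset, then True at once when the far corner is unreachable, else the
-- per-antidiagonal on-path-cell count check.
def isPossibleToCutPath_alt (grid : List (List Int)) : Bool :=
  let R := grid.length
  let C := (grid.getD 0 []).length
  let f := (List.range R).foldl (fun t i => (List.range C).foldl (fun t j =>
      if (!(i == 0) || !(j == 0)) && ((grid.getD i []).getD j 0 == 1) then
        pvSet2 t i j ((decide (0 < i) && pvGet2 false t (i-1) j) ||
                      (decide (0 < j) && pvGet2 false t i (j-1)))
      else t) t) (pvSet2 (List.replicate R (List.replicate C false)) 0 0 true)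
  let b := ((List.range R).reverse).foldl (fun t i => ((List.range C).reverse).foldl (fun t j =>
      if (!(i == R-1) || !(j == C-1)) && ((grid.getD i []).getD j 0 == 1) then
        pvSet2 t i j ((decide (i < R-1) && pvGet2 false t (i+1) j) ||
                      (decide (j < C-1) && pvGet2 false t i (j+1)))
      else t) t) (pvSet2 (List.replicate R (List.replicate C false)) (R-1) (C-1) true)
  if pvGet2 false f (R-1) (C-1) then
    -- for d in range(1, R+C-2): count on-path cells of antidiagonal d
    (List.range' 1 (R+C-3)).any (fun d =>
      ((List.range R).foldl (fun cnt (i : Nat) =>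
          let j : Int := (d : Int) - (i : Int)
          if 0 ≤ j && j < (C : Int) && pvGet2 false f i j.toNat && pvGet2 false b i j.toNat
          then cnt + 1 else cnt) (0:Nat)) ≤ 1)
  else true

-- ===== PRECONDITION & SPEC =====
-- Pre_ excludes exactly the inputs where Python A raises an IndexError: the empty grid,
-- an empty first row, and grids with some row shorter than the first row.
def Pre_isPossibleToCutPath (grid : List (List Int)) : Prop :=
  grid ≠ [] ∧ 0 < (grid.getD 0 []).length ∧
  ∀ row ∈ grid, (grid.getD 0 []).length ≤ row.length
instance (grid : List (List Int)) : Decidable (Pre_isPossibleToCutPath grid) := by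
  unfold Pre_isPossibleToCutPath; infer_instance

def pvWitness_isPossibleToCutPath : List (List Int) := [[1, 1], [0, 1]]

-- On grids of at least two cells whose bottom-right cell is not 1 while every non-corner
-- cell is 1 (outside the problem's guarantee that the corner cells are 1), A returns False
-- although the corners are already disconnected, while B returns True, the intended answer
-- since no flip is even needed.
def D_isPossibleToCutPath (grid : List (List Int)) : Prop :=
  grid ≠ [] ∧ 0 < (grid.getD 0 []).length ∧
  2 ≤ grid.length * (grid.getD 0 []).length ∧
  (grid.getD (grid.length - 1) []).getD ((grid.getD 0 []).length - 1) 0 ≠ 1 ∧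
  (∀ i < grid.length, ∀ j < (grid.getD 0 []).length,
    ¬ (i = 0 ∧ j = 0) → ¬ (i = grid.length - 1 ∧ j = (grid.getD 0 []).length - 1) →
      (grid.getD i []).getD j 0 = 1)
instance (grid : List (List Int)) : Decidable (D_isPossibleToCutPath grid) := by
  unfold D_isPossibleToCutPath; infer_instance

def Spec_isPossibleToCutPath (grid : List (List Int)) (out : Bool) : Prop := ¬ D_isPossibleToCutPath grid → out = isPossibleToCutPath_alt grid
instance (grid : List (List Int)) (out : Bool) : Decidable (Spec_isPossibleToCutPath grid out) := by unfold Spec_isPossibleToCutPath; infer_instance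

def pvDiffWitness_isPossibleToCutPath : List (List Int) := [[1, 1], [1, 0]]
def pvDiffWitnessOut_isPossibleToCutPath : Bool × Bool := (false, true)

-- ===== CLAIM (what is proved, stated in full; the proofs are below) =====
def Claim_unchanged_isPossibleToCutPath : Prop := ∀ (grid : List (List Int)), Dom_isPossibleToCutPath grid → Pre_isPossibleToCutPath grid → Spec_isPossibleToCutPath grid (isPossibleToCutPath grid)
def Claim_changed_isPossibleToCutPath : Prop := Dom_isPossibleToCutPath (pvDiffWitness_isPossibleToCutPath) ∧ Pre_isPossibleToCutPath (pvDiffWitness_isPossibleToCutPath) ∧ D_isPossibleToCutPath (pvDiffWitness_isPossibleToCutPath) ∧ isPossibleToCutPath (pvDiffWitness_isPossibleToCutPath) = pvDiffWitnessOut_isPossibleToCutPath.1 ∧ isPossibleToCutPath_alt (pvDiffWitness_isPossibleToCutPath) = pvDiffWitnessOut_isPossibleToCutPath.2 ∧ pvDiffWitnessOut_isPossibleToCutPath.1 ≠ pvDiffWitnessOut_isPossibleToCutPath.2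
def Claim_exact_isPossibleToCutPath : Prop := ∀ (grid : List (List Int)), Dom_isPossibleToCutPath grid → Pre_isPossibleToCutPath grid → D_isPossibleToCutPath grid → isPossibleToCutPath grid ≠ isPossibleToCutPath_alt grid

-- ===== LEMMAS AND PROOFS =====


-- ---------- generic 2-D table infrastructure ----------

def pvMk {α : Type} (R C : Nat) (f : Nat → Nat → α) : List (List α) :=
  (List.range R).map (fun i => (List.range C).map (fun j => f i j))

theorem pvMk_congr {α : Type} {R C : Nat} {f f' : Nat → Nat → α}
    (h : ∀ p q, p < R → q < C → f p q = f' p q) : pvMk R C f = pvMk R C f' := by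
  unfold pvMk
  apply List.ext_getElem (by simp)
  intro p hp1 hp2
  simp only [List.getElem_map, List.getElem_range]
  apply List.ext_getElem (by simp)
  intro q hq1 hq2
  simp only [List.getElem_map, List.getElem_range]
  exact h p q (by simpa using hp1) (by simpa using hq1)

theorem pvGet2_pvMk {α : Type} (dv : α) {R C : Nat} (f : Nat → Nat → α) {i j : Nat}
    (hi : i < R) (hj : j < C) : pvGet2 dv (pvMk R C f) i j = f i j := by
  simp [pvGet2, pvMk, List.getD_eq_getElem?_getD, hi, hj]

theorem pvSet2_pvMk {α : Type} {R C : Nat} (f : Nat → Nat → α) {i j : Nat} (v : α)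
    (hi : i < R) (hj : j < C) :
    pvSet2 (pvMk R C f) i j v
      = pvMk R C (fun p q => if p = i ∧ q = j then v else f p q) := by
  unfold pvSet2 pvMk
  apply List.ext_getElem (by simp)
  intro p hp1 hp2
  have hp : p < R := by simpa using hp2
  rw [List.getElem_set]
  simp only [List.getElem_map, List.getElem_range]
  by_cases hpi : i = p
  · subst hpi
    simp only [eq_self_iff_true, if_true, true_and, List.getD_eq_getElem?_getD,
      List.getElem?_map, List.getElem?_range, hi, Option.map_some, Option.getD_some]
    apply List.ext_getElem (by simp)
    intro q hq1 hq2
    have hq : q < C := by simpa using hq2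
    rw [List.getElem_set]
    simp only [List.getElem_map, List.getElem_range]
    by_cases hqj : j = q
    · subst hqj; simp
    · have hq2 : ¬ q = j := fun h => hqj h.symm
      simp [hqj, hq2]
  · simp only [if_neg hpi]
    apply List.ext_getElem (by simp)
    intro q hq1 hq2
    simp only [List.getElem_map, List.getElem_range]
    have : ¬ (p = i ∧ q = j) := by intro h; exact hpi h.1.symm
    simp [this]

def pvSpecF {α : Type} (F : Nat → Nat → α → α → α → α) (init : Nat → Nat → α) (dv : α) :
    Nat → Nat → α
  | 0, 0 => F 0 0 (init 0 0) dv dv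
  | 0, j+1 => F 0 (j+1) (init 0 (j+1)) dv (pvSpecF F init dv 0 j)
  | i+1, 0 => F (i+1) 0 (init (i+1) 0) (pvSpecF F init dv i 0) dv
  | i+1, j+1 => F (i+1) (j+1) (init (i+1) (j+1)) (pvSpecF F init dv i (j+1)) (pvSpecF F init dv (i+1) j)

theorem pvSpecF_eq {α : Type} (F : Nat → Nat → α → α → α → α) (init : Nat → Nat → α) (dv : α)
    (i j : Nat) :
    pvSpecF F init dv i j
      = F i j (init i j) (if i = 0 then dv else pvSpecF F init dv (i-1) j)
          (if j = 0 then dv else pvSpecF F init dv i (j-1)) := by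
  rcases i with _|i <;> rcases j with _|j <;> simp [pvSpecF]

def pvSpecB {α : Type} (R C : Nat) (F : Nat → Nat → α → α → α → α)
    (init : Nat → Nat → α) (dv : α) (i j : Nat) : α :=
  F i j (init i j) (if h : i + 1 < R then pvSpecB R C F init dv (i+1) j else dv)
      (if h : j + 1 < C then pvSpecB R C F init dv i (j+1) else dv)
termination_by (R - i, C - j)
decreasing_by
  · exact Prod.Lex.left _ _ (by omega)
  · exact Prod.Lex.right _ (by omega)

theorem pvSpecB_eq {α : Type} (R C : Nat) (F : Nat → Nat → α → α → α → α)
    (init : Nat → Nat → α) (dv : α) (i j : Nat) :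
    pvSpecB R C F init dv i j
      = F i j (init i j) (if i + 1 < R then pvSpecB R C F init dv (i+1) j else dv)
          (if j + 1 < C then pvSpecB R C F init dv i (j+1) else dv) := by
  rw [pvSpecB]
  congr 1


-- the row-major double loop fills the table with pvSpecF
theorem pvFillFwd {α : Type} (R C : Nat) (F : Nat → Nat → α → α → α → α)
    (init : Nat → Nat → α) (dv : α)
    (body : List (List α) → Nat → Nat → List (List α))
    (hbody : ∀ (h : Nat → Nat → α) (i j : Nat), i < R → j < C →
      body (pvMk R C h) i j = pvMk R C (fun p q =>
        if p = i ∧ q = j then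
          F i j (h i j) (if i = 0 then dv else h (i-1) j) (if j = 0 then dv else h i (j-1))
        else h p q)) :
    (List.range R).foldl (fun t i => (List.range C).foldl (fun t j => body t i j) t)
      (pvMk R C init) = pvMk R C (pvSpecF F init dv) := by
  set sp := pvSpecF F init dv with hsp
  set mix : Nat → Nat → Nat → Nat → α := fun k l p q =>
    if p < k ∨ (p = k ∧ q < l) then sp p q else init p q with hmix
  have hrow : ∀ k, k < R → ∀ l, l ≤ C →
      (List.range l).foldl (fun t j => body t k j) (pvMk R C (mix k 0)) = pvMk R C (mix k l) := by
    intro k hk l hl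
    induction l with
    | zero => rfl
    | succ l ih =>
      have hl' : l ≤ C := Nat.le_of_succ_le hl
      rw [List.range_succ, List.foldl_append, ih hl']
      simp only [List.foldl_cons, List.foldl_nil]
      rw [hbody (mix k l) k l hk (by omega)]
      apply pvMk_congr
      intro p q hp hq
      by_cases hc : p = k ∧ q = l
      · rw [if_pos hc]
        have hval : F k l (mix k l k l)
            (if k = 0 then dv else mix k l (k-1) l)
            (if l = 0 then dv else mix k l k (l-1)) = sp k l := by
          have e := pvSpecF_eq F init dv k l
          rw [← hsp] at e
          rw [e]
          have m1 : mix k l k l = init k l := by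
            simp only [hmix]; exact if_neg (by omega)
          rw [m1]
          congr 1
          · by_cases hk0 : k = 0
            · rw [if_pos hk0, if_pos hk0]
            · rw [if_neg hk0, if_neg hk0]
              simp only [hmix]
              exact if_pos (show k - 1 < k ∨ (k - 1 = k ∧ l < l) by omega)
          · by_cases hl0 : l = 0
            · rw [if_pos hl0, if_pos hl0]
            · rw [if_neg hl0, if_neg hl0]
              simp only [hmix]
              exact if_pos (Or.inr ⟨trivial, by omega⟩)
        rw [hval]
        simp only [hmix]
        rw [if_pos (by omega : p < k ∨ (p = k ∧ q < l + 1))]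
        rw [hc.1, hc.2]
      · rw [if_neg hc]
        simp only [hmix]
        by_cases hd : p < k ∨ (p = k ∧ q < l)
        · rw [if_pos hd, if_pos (by omega)]
        · rw [if_neg hd, if_neg (by omega)]
  have houter : ∀ k, k ≤ R →
      (List.range k).foldl (fun t i => (List.range C).foldl (fun t j => body t i j) t)
        (pvMk R C init) = pvMk R C (mix k 0) := by
    intro k hk
    induction k with
    | zero =>
      apply pvMk_congr; intro p q hp hq
      simp only [hmix]
      rw [if_neg (by omega)]
    | succ k ih =>
      rw [List.range_succ, List.foldl_append, ih (by omega)]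
      simp only [List.foldl_cons, List.foldl_nil]
      rw [hrow k (by omega) C (le_refl C)]
      apply pvMk_congr; intro p q hp hq
      simp only [hmix]
      by_cases hd : p < k ∨ (p = k ∧ q < C)
      · rw [if_pos hd, if_pos (by omega)]
      · rw [if_neg hd, if_neg (by omega)]
  rw [houter R (le_refl R)]
  apply pvMk_congr; intro p q hp hq
  simp only [hmix]
  rw [if_pos (by omega)]


-- the reverse row-major double loop fills the table with pvSpecB
theorem pvFillBwd {α : Type} (R C : Nat) (F : Nat → Nat → α → α → α → α)
    (init : Nat → Nat → α) (dv : α)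
    (body : List (List α) → Nat → Nat → List (List α))
    (hbody : ∀ (h : Nat → Nat → α) (i j : Nat), i < R → j < C →
      body (pvMk R C h) i j = pvMk R C (fun p q =>
        if p = i ∧ q = j then
          F i j (h i j) (if i + 1 < R then h (i+1) j else dv) (if j + 1 < C then h i (j+1) else dv)
        else h p q)) :
    ((List.range R).reverse).foldl
        (fun t i => ((List.range C).reverse).foldl (fun t j => body t i j) t)
      (pvMk R C init) = pvMk R C (pvSpecB R C F init dv) := by
  set sp := pvSpecB R C F init dv with hsp
  set mix : Nat → Nat → Nat → Nat → α := fun k l p q =>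
    if k < p ∨ (p = k ∧ l ≤ q) then sp p q else init p q with hmix
  have hrev : ∀ n : Nat, (List.range (n+1)).reverse = n :: (List.range n).reverse := by
    intro n; rw [List.range_succ, List.reverse_append]; rfl
  have hrow : ∀ k, k < R → ∀ l, l ≤ C →
      ((List.range l).reverse).foldl (fun t j => body t k j) (pvMk R C (mix k l))
        = pvMk R C (mix k 0) := by
    intro k hk l hl
    induction l with
    | zero => rfl
    | succ l ih =>
      rw [hrev, List.foldl_cons]
      rw [hbody (mix k (l+1)) k l hk (by omega)]
      have hstep : pvMk R C (fun p q =>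
          if p = k ∧ q = l then
            F k l (mix k (l+1) k l)
              (if k + 1 < R then mix k (l+1) (k+1) l else dv)
              (if l + 1 < C then mix k (l+1) k (l+1) else dv)
          else mix k (l+1) p q) = pvMk R C (mix k l) := by
        apply pvMk_congr
        intro p q hp hq
        by_cases hc : p = k ∧ q = l
        · rw [if_pos hc]
          have hval : F k l (mix k (l+1) k l)
              (if k + 1 < R then mix k (l+1) (k+1) l else dv)
              (if l + 1 < C then mix k (l+1) k (l+1) else dv) = sp k l := by
            have e := pvSpecB_eq R C F init dv k l
            rw [← hsp] at e
            rw [e]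
            have m1 : mix k (l+1) k l = init k l := by
              simp only [hmix]; exact if_neg (by omega)
            rw [m1]
            congr 1
            · by_cases hk0 : k + 1 < R
              · rw [if_pos hk0, if_pos hk0]
                simp only [hmix]
                exact if_pos (Or.inl (by omega))
              · rw [if_neg hk0, if_neg hk0]
            · by_cases hl0 : l + 1 < C
              · rw [if_pos hl0, if_pos hl0]
                simp only [hmix]
                exact if_pos (Or.inr ⟨trivial, by omega⟩)
              · rw [if_neg hl0, if_neg hl0]
          rw [hval]
          simp only [hmix]
          rw [if_pos (show k < p ∨ (p = k ∧ l ≤ q) from Or.inr ⟨hc.1, by omega⟩)]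
          rw [hc.1, hc.2]
        · rw [if_neg hc]
          simp only [hmix]
          by_cases hd : k < p ∨ (p = k ∧ l + 1 ≤ q)
          · rw [if_pos hd, if_pos (by omega)]
          · rw [if_neg hd, if_neg (by omega)]
      rw [hstep]
      exact ih (by omega)
  have houter : ∀ k, k ≤ R →
      ((List.range k).reverse).foldl
          (fun t i => ((List.range C).reverse).foldl (fun t j => body t i j) t)
        (pvMk R C (fun p q => if k ≤ p then sp p q else init p q))
        = pvMk R C (fun p q => if (0:Nat) ≤ p then sp p q else init p q) := by
    intro k hk
    induction k with
    | zero =>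
      apply pvMk_congr; intro p q hp hq
      simp
    | succ k ih =>
      rw [hrev, List.foldl_cons]
      have hstart : pvMk R C (fun p q => if k + 1 ≤ p then sp p q else init p q)
          = pvMk R C (mix k C) := by
        apply pvMk_congr; intro p q hp hq
        simp only [hmix]
        by_cases hd : k + 1 ≤ p
        · rw [if_pos hd, if_pos (Or.inl (by omega))]
        · rw [if_neg hd, if_neg (by omega)]
      rw [hstart, hrow k (by omega) C (le_refl C)]
      have hmid : pvMk R C (mix k 0)
          = pvMk R C (fun p q => if k ≤ p then sp p q else init p q) := by
        apply pvMk_congr; intro p q hp hq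
        simp only [hmix]
        by_cases hd : k ≤ p
        · rw [if_pos (by omega), if_pos hd]
        · rw [if_neg (by omega), if_neg hd]
      rw [hmid]
      exact ih (by omega)
  have hinit : pvMk R C init
      = pvMk R C (fun p q => if R ≤ p then sp p q else init p q) := by
    apply pvMk_congr; intro p q hp hq
    rw [if_neg (by omega)]
  rw [hinit, houter R (le_refl R)]
  apply pvMk_congr; intro p q hp hq
  rw [if_pos (by omega)]


-- ---------- the cell-recurrence specifications ----------

def pvFA (g : Nat → Nat → Int) (i j : Nat) (cur up left : Int) : Int :=
  if g i j == 1 then cur + up + left else cur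
def pvInit1 (i j : Nat) : Int := if i = 0 ∧ j = 0 then 1 else 0
def pvInit2 (R C i j : Nat) : Int := if i = R-1 ∧ j = C-1 then 1 else 0
def pvA1 (g : Nat → Nat → Int) : Nat → Nat → Int := pvSpecF (pvFA g) pvInit1 0
def pvA2 (g : Nat → Nat → Int) (R C : Nat) : Nat → Nat → Int :=
  pvSpecB R C (pvFA g) (pvInit2 R C) 0
def pvFBf (g : Nat → Nat → Int) (i j : Nat) (cur up left : Bool) : Bool :=
  if i = 0 ∧ j = 0 then true
  else if g i j == 1 then (decide (0 < i) && up) || (decide (0 < j) && left) else cur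
def pvFBb (g : Nat → Nat → Int) (R C i j : Nat) (cur up left : Bool) : Bool :=
  if i = R-1 ∧ j = C-1 then true
  else if g i j == 1 then (decide (i < R-1) && up) || (decide (j < C-1) && left) else cur
def pvF1 (g : Nat → Nat → Int) : Nat → Nat → Bool := pvSpecF (pvFBf g) (fun _ _ => false) false
def pvB1 (g : Nat → Nat → Int) (R C : Nat) : Nat → Nat → Bool :=
  pvSpecB R C (pvFBb g R C) (fun _ _ => false) false

-- the recurrences of B's loops (corner preset in the initial table, the loop body skips it)
def pvFBf2 (g : Nat → Nat → Int) (i j : Nat) (cur up left : Bool) : Bool :=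
  if (!(i == 0) || !(j == 0)) && (g i j == 1)
  then (decide (0 < i) && up) || (decide (0 < j) && left) else cur
def pvFBb2 (g : Nat → Nat → Int) (R C i j : Nat) (cur up left : Bool) : Bool :=
  if (!(i == R-1) || !(j == C-1)) && (g i j == 1)
  then (decide (i < R-1) && up) || (decide (j < C-1) && left) else cur
def pvInitS (i j : Nat) : Bool := decide (i = 0 ∧ j = 0)
def pvInitSB (R C i j : Nat) : Bool := decide (i = R-1 ∧ j = C-1)
def pvF2 (g : Nat → Nat → Int) : Nat → Nat → Bool := pvSpecF (pvFBf2 g) pvInitS false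
def pvB2 (g : Nat → Nat → Int) (R C : Nat) : Nat → Nat → Bool :=
  pvSpecB R C (pvFBb2 g R C) (pvInitSB R C) false

theorem pvRepl_eq_pvMk {α : Type} (R C : Nat) (v : α) :
    List.replicate R (List.replicate C v) = pvMk R C (fun _ _ => v) := by
  unfold pvMk
  apply List.ext_getElem (by simp)
  intro p hp1 hp2
  simp

theorem pvGet2_pvMk_oob_row {α : Type} (dv : α) {R C : Nat} (f : Nat → Nat → α) {i : Nat}
    (j : Nat) (hi : R ≤ i) : pvGet2 dv (pvMk R C f) i j = dv := by
  simp [pvGet2, pvMk, List.getD_eq_getElem?_getD, List.getElem?_eq_none, hi]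

theorem pvGet2_pvMk_oob_col {α : Type} (dv : α) {R C : Nat} (f : Nat → Nat → α) (i : Nat)
    {j : Nat} (hj : C ≤ j) : pvGet2 dv (pvMk R C f) i j = dv := by
  by_cases hi : i < R
  · simp [pvGet2, pvMk, List.getD_eq_getElem?_getD, hi, List.getElem?_eq_none, hj]
  · exact pvGet2_pvMk_oob_row dv f j (by omega)

-- B's recurrences compute the same tables as the corner-exempt recurrences
theorem pvF2_eq' (g : Nat → Nat → Int) (i j : Nat) :
    pvF2 g i j = pvFBf2 g i j (pvInitS i j)
      (if i = 0 then false else pvF2 g (i-1) j) (if j = 0 then false else pvF2 g i (j-1)) := by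
  unfold pvF2; exact pvSpecF_eq _ _ _ i j

theorem pvB2_eq' (g : Nat → Nat → Int) (R C i j : Nat) :
    pvB2 g R C i j = pvFBb2 g R C i j (pvInitSB R C i j)
      (if i + 1 < R then pvB2 g R C (i+1) j else false)
      (if j + 1 < C then pvB2 g R C i (j+1) else false) := by
  unfold pvB2; exact pvSpecB_eq _ _ _ _ _ i j

theorem pvF1_eq (g : Nat → Nat → Int) (i j : Nat) :
    pvF1 g i j = pvFBf g i j false
      (if i = 0 then false else pvF1 g (i-1) j) (if j = 0 then false else pvF1 g i (j-1)) := by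
  unfold pvF1
  have e := pvSpecF_eq (pvFBf g) (fun _ _ => false) false i j
  simpa using e

theorem pvB1_eq (g : Nat → Nat → Int) (R C i j : Nat) :
    pvB1 g R C i j = pvFBb g R C i j false
      (if i + 1 < R then pvB1 g R C (i+1) j else false)
      (if j + 1 < C then pvB1 g R C i (j+1) else false) := by
  unfold pvB1
  have e := pvSpecB_eq R C (pvFBb g R C) (fun _ _ => false) false i j
  simpa using e

theorem pvF2_corner (g : Nat → Nat → Int) : pvF2 g 0 0 = pvF1 g 0 0 := by
  rw [pvF2_eq', pvF1_eq]
  unfold pvFBf2 pvFBf pvInitS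
  simp

theorem pvF2_eq_pvF1_aux (g : Nat → Nat → Int) :
    ∀ n i j, i + j ≤ n → pvF2 g i j = pvF1 g i j := by
  intro n
  induction n with
  | zero =>
    intro i j h
    have hi : i = 0 := by omega
    have hj : j = 0 := by omega
    subst hi; subst hj
    exact pvF2_corner g
  | succ n ih =>
    intro i j h
    by_cases hc0 : i = 0 ∧ j = 0
    · obtain ⟨rfl, rfl⟩ := hc0
      exact pvF2_corner g
    · rw [pvF2_eq', pvF1_eq]
      unfold pvFBf2 pvFBf
      have hup : (if i = 0 then false else pvF2 g (i-1) j)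
          = (if i = 0 then false else pvF1 g (i-1) j) := by
        by_cases hi0 : i = 0
        · rw [if_pos hi0, if_pos hi0]
        · rw [if_neg hi0, if_neg hi0]
          exact ih (i-1) j (by omega)
      have hleft : (if j = 0 then false else pvF2 g i (j-1))
          = (if j = 0 then false else pvF1 g i (j-1)) := by
        by_cases hj0 : j = 0
        · rw [if_pos hj0, if_pos hj0]
        · rw [if_neg hj0, if_neg hj0]
          exact ih i (j-1) (by omega)
      rw [hup, hleft]
      have hb : (!(i == 0) || !(j == 0)) = true := by
        simp only [Bool.or_eq_true, Bool.not_eq_true', beq_eq_false_iff_ne, ne_eq]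
        tauto
      rw [hb, Bool.true_and, if_neg hc0]
      by_cases hg : g i j == 1
      · rw [if_pos hg, if_pos hg]
      · rw [if_neg hg, if_neg hg]
        simp [pvInitS, hc0]

theorem pvF2_eq_pvF1 (g : Nat → Nat → Int) (i j : Nat) : pvF2 g i j = pvF1 g i j :=
  pvF2_eq_pvF1_aux g (i+j) i j le_rfl

theorem pvB2_corner (g : Nat → Nat → Int) (R C i j : Nat) (hc0 : i = R-1 ∧ j = C-1) :
    pvB2 g R C i j = pvB1 g R C i j := by
  rw [pvB2_eq', pvB1_eq]
  unfold pvFBb2 pvFBb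
  have hb : (!(i == R-1) || !(j == C-1)) = false := by simp [hc0.1, hc0.2]
  rw [hb, Bool.false_and, if_neg (by simp : ¬ (false = true)), if_pos hc0]
  simp [pvInitSB, hc0.1, hc0.2]

theorem pvB2_eq_pvB1_aux (g : Nat → Nat → Int) (R C : Nat) :
    ∀ n i j, R - i + (C - j) ≤ n → pvB2 g R C i j = pvB1 g R C i j := by
  intro n
  induction n with
  | zero =>
    intro i j h
    by_cases hc0 : i = R-1 ∧ j = C-1
    · exact pvB2_corner g R C i j hc0
    · rw [pvB2_eq', pvB1_eq]
      unfold pvFBb2 pvFBb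
      rw [if_neg (by omega : ¬ (i + 1 < R)), if_neg (by omega : ¬ (j + 1 < C)),
        if_neg (by omega : ¬ (i + 1 < R)), if_neg (by omega : ¬ (j + 1 < C))]
      have hb : (!(i == R-1) || !(j == C-1)) = true := by
        simp only [Bool.or_eq_true, Bool.not_eq_true', beq_eq_false_iff_ne, ne_eq]
        tauto
      rw [hb, Bool.true_and, if_neg hc0]
      by_cases hg : g i j == 1
      · rw [if_pos hg, if_pos hg]
      · rw [if_neg hg, if_neg hg]
        simp [pvInitSB, hc0]
  | succ n ih =>
    intro i j h
    by_cases hc0 : i = R-1 ∧ j = C-1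
    · exact pvB2_corner g R C i j hc0
    · rw [pvB2_eq', pvB1_eq]
      unfold pvFBb2 pvFBb
      have hup : (if i + 1 < R then pvB2 g R C (i+1) j else false)
          = (if i + 1 < R then pvB1 g R C (i+1) j else false) := by
        by_cases hi0 : i + 1 < R
        · rw [if_pos hi0, if_pos hi0]; exact ih (i+1) j (by omega)
        · rw [if_neg hi0, if_neg hi0]
      have hright : (if j + 1 < C then pvB2 g R C i (j+1) else false)
          = (if j + 1 < C then pvB1 g R C i (j+1) else false) := by
        by_cases hj0 : j + 1 < C
        · rw [if_pos hj0, if_pos hj0]; exact ih i (j+1) (by omega)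
        · rw [if_neg hj0, if_neg hj0]
      rw [hup, hright]
      have hb : (!(i == R-1) || !(j == C-1)) = true := by
        simp only [Bool.or_eq_true, Bool.not_eq_true', beq_eq_false_iff_ne, ne_eq]
        tauto
      rw [hb, Bool.true_and, if_neg hc0]
      by_cases hg : g i j == 1
      · rw [if_pos hg, if_pos hg]
      · rw [if_neg hg, if_neg hg]
        simp [pvInitSB, hc0]

theorem pvB2_eq_pvB1 (g : Nat → Nat → Int) (R C i j : Nat) :
    pvB2 g R C i j = pvB1 g R C i j :=
  pvB2_eq_pvB1_aux g R C (R - i + (C - j)) i j le_rfl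

-- A's forward table dp1 computes pvA1
theorem pvDp1_char (grid : List (List Int)) (hR : 0 < grid.length)
    (hC : 0 < (grid.getD 0 []).length) :
    (List.range grid.length).foldl (fun t i =>
        (List.range (grid.getD 0 []).length).foldl (fun t j =>
          if (grid.getD i []).getD j 0 == 1 then
            let t1 := if 0 < i then pvSet2 t i j (pvGet2 0 t i j + pvGet2 0 t (i-1) j) else t
            let t2 := if 0 < j then pvSet2 t1 i j (pvGet2 0 t1 i j + pvGet2 0 t1 i (j-1)) else t1
            t2
          else t) t)
      (pvSet2 (List.replicate grid.length (List.replicate (grid.getD 0 []).length (0:Int))) 0 0 1)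
    = pvMk grid.length (grid.getD 0 []).length
        (pvA1 (fun i j => (grid.getD i []).getD j 0)) := by
  have hinit : pvSet2 (List.replicate grid.length
        (List.replicate (grid.getD 0 []).length (0:Int))) 0 0 1
      = pvMk grid.length (grid.getD 0 []).length pvInit1 := by
    rw [pvRepl_eq_pvMk, pvSet2_pvMk _ _ hR hC]
    apply pvMk_congr; intro p q hp hq
    simp [pvInit1]
  rw [hinit]
  apply pvFillFwd grid.length (grid.getD 0 []).length
    (pvFA (fun i j => (grid.getD i []).getD j 0)) pvInit1 0
  intro h i j hi hj
  dsimp only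
  by_cases hg : (grid.getD i []).getD j 0 == 1
  · rw [if_pos hg]
    by_cases hi0 : 0 < i <;> by_cases hj0 : 0 < j
    · rw [if_pos hi0]
      rw [pvGet2_pvMk _ _ hi hj, pvGet2_pvMk _ _ (by omega : i-1 < grid.length) hj,
        pvSet2_pvMk _ _ hi hj]
      rw [if_pos hj0]
      rw [pvGet2_pvMk _ _ hi hj, pvGet2_pvMk _ _ hi (by omega : j-1 < (grid.getD 0 []).length),
        pvSet2_pvMk _ _ hi hj]
      apply pvMk_congr; intro p q hp hq
      by_cases hc : p = i ∧ q = j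
      · rw [if_pos hc, if_pos hc]
        rw [if_pos (show i = i ∧ j = j from ⟨rfl, rfl⟩)]
        rw [if_neg (show ¬ (i = i ∧ j - 1 = j) by omega)]
        simp only [pvFA, if_pos hg]
        rw [if_neg (show i = 0 → False by omega), if_neg (show j = 0 → False by omega)]
      · rw [if_neg hc, if_neg hc, if_neg hc]
    · rw [if_pos hi0]
      rw [pvGet2_pvMk _ _ hi hj, pvGet2_pvMk _ _ (by omega : i-1 < grid.length) hj,
        pvSet2_pvMk _ _ hi hj]
      rw [if_neg hj0]
      apply pvMk_congr; intro p q hp hq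
      by_cases hc : p = i ∧ q = j
      · rw [if_pos hc, if_pos hc]
        simp only [pvFA, if_pos hg]
        rw [if_neg (show i = 0 → False by omega), if_pos (show j = 0 by omega)]
        ring
      · rw [if_neg hc, if_neg hc]
    · rw [if_neg hi0, if_pos hj0]
      rw [pvGet2_pvMk _ _ hi hj, pvGet2_pvMk _ _ hi (by omega : j-1 < (grid.getD 0 []).length),
        pvSet2_pvMk _ _ hi hj]
      apply pvMk_congr; intro p q hp hq
      by_cases hc : p = i ∧ q = j
      · rw [if_pos hc, if_pos hc]
        simp only [pvFA, if_pos hg]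
        rw [if_pos (show i = 0 by omega), if_neg (show j = 0 → False by omega)]
        ring
      · rw [if_neg hc, if_neg hc]
    · rw [if_neg hi0, if_neg hj0]
      apply pvMk_congr; intro p q hp hq
      by_cases hc : p = i ∧ q = j
      · rw [if_pos hc]
        simp only [pvFA, if_pos hg]
        rw [if_pos (show i = 0 by omega), if_pos (show j = 0 by omega)]
        rw [hc.1, hc.2]
        ring
      · rw [if_neg hc]
  · rw [if_neg hg]
    apply pvMk_congr; intro p q hp hq
    by_cases hc : p = i ∧ q = j
    · rw [if_pos hc]
      simp only [pvFA, if_neg hg]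
      rw [hc.1, hc.2]
    · rw [if_neg hc]


-- A's backward table dp2 computes pvA2
theorem pvDp2_char (grid : List (List Int)) (hR : 0 < grid.length)
    (hC : 0 < (grid.getD 0 []).length) :
    ((List.range grid.length).reverse).foldl (fun t i =>
        ((List.range (grid.getD 0 []).length).reverse).foldl (fun t j =>
          if (grid.getD i []).getD j 0 == 1 then
            let t1 := if i < grid.length - 1 then
                pvSet2 t i j (pvGet2 0 t i j + pvGet2 0 t (i+1) j) else t
            let t2 := if j < (grid.getD 0 []).length - 1 then
                pvSet2 t1 i j (pvGet2 0 t1 i j + pvGet2 0 t1 i (j+1)) else t1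
            t2
          else t) t)
      (pvSet2 (List.replicate grid.length (List.replicate (grid.getD 0 []).length (0:Int)))
        (grid.length - 1) ((grid.getD 0 []).length - 1) 1)
    = pvMk grid.length (grid.getD 0 []).length
        (pvA2 (fun i j => (grid.getD i []).getD j 0) grid.length (grid.getD 0 []).length) := by
  have hinit : pvSet2 (List.replicate grid.length
        (List.replicate (grid.getD 0 []).length (0:Int)))
        (grid.length - 1) ((grid.getD 0 []).length - 1) 1
      = pvMk grid.length (grid.getD 0 []).length
          (pvInit2 grid.length (grid.getD 0 []).length) := by
    rw [pvRepl_eq_pvMk, pvSet2_pvMk _ _ (by omega) (by omega)]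
    apply pvMk_congr; intro p q hp hq
    simp [pvInit2]
  rw [hinit]
  apply pvFillBwd grid.length (grid.getD 0 []).length
    (pvFA (fun i j => (grid.getD i []).getD j 0))
    (pvInit2 grid.length (grid.getD 0 []).length) 0
  intro h i j hi hj
  dsimp only
  by_cases hg : (grid.getD i []).getD j 0 == 1
  · rw [if_pos hg]
    by_cases hi0 : i < grid.length - 1 <;> by_cases hj0 : j < (grid.getD 0 []).length - 1
    · rw [if_pos hi0]
      rw [pvGet2_pvMk _ _ hi hj, pvGet2_pvMk _ _ (by omega : i+1 < grid.length) hj,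
        pvSet2_pvMk _ _ hi hj]
      rw [if_pos hj0]
      rw [pvGet2_pvMk _ _ hi hj,
        pvGet2_pvMk _ _ hi (by omega : j+1 < (grid.getD 0 []).length),
        pvSet2_pvMk _ _ hi hj]
      apply pvMk_congr; intro p q hp hq
      by_cases hc : p = i ∧ q = j
      · rw [if_pos hc, if_pos hc]
        rw [if_pos (show i = i ∧ j = j from ⟨rfl, rfl⟩)]
        rw [if_neg (show ¬ (i = i ∧ j + 1 = j) by omega)]
        simp only [pvFA, if_pos hg]
        rw [if_pos (show i + 1 < grid.length by omega),
          if_pos (show j + 1 < (grid.getD 0 []).length by omega)]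
      · rw [if_neg hc, if_neg hc, if_neg hc]
    · rw [if_pos hi0]
      rw [pvGet2_pvMk _ _ hi hj, pvGet2_pvMk _ _ (by omega : i+1 < grid.length) hj,
        pvSet2_pvMk _ _ hi hj]
      rw [if_neg hj0]
      apply pvMk_congr; intro p q hp hq
      by_cases hc : p = i ∧ q = j
      · rw [if_pos hc, if_pos hc]
        simp only [pvFA, if_pos hg]
        rw [if_pos (show i + 1 < grid.length by omega),
          if_neg (show ¬ (j + 1 < (grid.getD 0 []).length) by omega)]
        ring
      · rw [if_neg hc, if_neg hc]
    · rw [if_neg hi0, if_pos hj0]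
      rw [pvGet2_pvMk _ _ hi hj,
        pvGet2_pvMk _ _ hi (by omega : j+1 < (grid.getD 0 []).length),
        pvSet2_pvMk _ _ hi hj]
      apply pvMk_congr; intro p q hp hq
      by_cases hc : p = i ∧ q = j
      · rw [if_pos hc, if_pos hc]
        simp only [pvFA, if_pos hg]
        rw [if_neg (show ¬ (i + 1 < grid.length) by omega),
          if_pos (show j + 1 < (grid.getD 0 []).length by omega)]
        ring
      · rw [if_neg hc, if_neg hc]
    · rw [if_neg hi0, if_neg hj0]
      apply pvMk_congr; intro p q hp hq
      by_cases hc : p = i ∧ q = j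
      · rw [if_pos hc]
        simp only [pvFA, if_pos hg]
        rw [if_neg (show ¬ (i + 1 < grid.length) by omega),
          if_neg (show ¬ (j + 1 < (grid.getD 0 []).length) by omega)]
        rw [hc.1, hc.2]
        ring
      · rw [if_neg hc]
  · rw [if_neg hg]
    apply pvMk_congr; intro p q hp hq
    by_cases hc : p = i ∧ q = j
    · rw [if_pos hc]
      simp only [pvFA, if_neg hg]
      rw [hc.1, hc.2]
    · rw [if_neg hc]

-- B's forward boolean table computes pvF1
theorem pvFfwd_char (grid : List (List Int)) (hR : 0 < grid.length)
    (hC : 0 < (grid.getD 0 []).length) :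
    (List.range grid.length).foldl (fun t i =>
        (List.range (grid.getD 0 []).length).foldl (fun t j =>
          if (!(i == 0) || !(j == 0)) && ((grid.getD i []).getD j 0 == 1) then
            pvSet2 t i j ((decide (0 < i) && pvGet2 false t (i-1) j) ||
                          (decide (0 < j) && pvGet2 false t i (j-1)))
          else t) t)
      (pvSet2 (List.replicate grid.length (List.replicate (grid.getD 0 []).length false)) 0 0 true)
    = pvMk grid.length (grid.getD 0 []).length
        (pvF1 (fun i j => (grid.getD i []).getD j 0)) := by
  have hinit : pvSet2 (List.replicate grid.length
        (List.replicate (grid.getD 0 []).length false)) 0 0 true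
      = pvMk grid.length (grid.getD 0 []).length pvInitS := by
    rw [pvRepl_eq_pvMk, pvSet2_pvMk _ _ hR hC]
    apply pvMk_congr; intro p q hp hq
    simp [pvInitS]
  rw [hinit]
  have hfill := pvFillFwd grid.length (grid.getD 0 []).length
    (pvFBf2 (fun i j => (grid.getD i []).getD j 0)) pvInitS false
    (fun t i j =>
      if (!(i == 0) || !(j == 0)) && ((grid.getD i []).getD j 0 == 1) then
        pvSet2 t i j ((decide (0 < i) && pvGet2 false t (i-1) j) ||
                      (decide (0 < j) && pvGet2 false t i (j-1)))
      else t) ?_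
  · rw [hfill]
    apply pvMk_congr; intro p q hp hq
    exact pvF2_eq_pvF1 (fun i j => (grid.getD i []).getD j 0) p q
  · intro h i j hi hj
    dsimp only
    by_cases hcnd : ((!(i == 0) || !(j == 0)) && ((grid.getD i []).getD j 0 == 1)) = true
    · rw [if_pos hcnd]
      have hup : (decide (0 < i) && pvGet2 false (pvMk grid.length (grid.getD 0 []).length h) (i-1) j)
          = (decide (0 < i) && (if i = 0 then false else h (i-1) j)) := by
        by_cases hi0 : i = 0
        · subst hi0; simp
        · rw [if_neg hi0, pvGet2_pvMk false _ (by omega) hj]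
      have hleft : (decide (0 < j) && pvGet2 false (pvMk grid.length (grid.getD 0 []).length h) i (j-1))
          = (decide (0 < j) && (if j = 0 then false else h i (j-1))) := by
        by_cases hj0 : j = 0
        · subst hj0; simp
        · rw [if_neg hj0, pvGet2_pvMk false _ hi (by omega)]
      rw [hup, hleft, pvSet2_pvMk _ _ hi hj]
      apply pvMk_congr; intro p q hp hq
      by_cases hc : p = i ∧ q = j
      · rw [if_pos hc, if_pos hc]
        simp only [pvFBf2, if_pos hcnd]
      · rw [if_neg hc, if_neg hc]
    · rw [if_neg hcnd]
      apply pvMk_congr; intro p q hp hq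
      by_cases hc : p = i ∧ q = j
      · rw [if_pos hc]
        simp only [pvFBf2, if_neg hcnd]
        rw [hc.1, hc.2]
      · rw [if_neg hc]

-- B's backward boolean table computes pvB1
theorem pvFbwd_char (grid : List (List Int)) (hR : 0 < grid.length)
    (hC : 0 < (grid.getD 0 []).length) :
    ((List.range grid.length).reverse).foldl (fun t i =>
        ((List.range (grid.getD 0 []).length).reverse).foldl (fun t j =>
          if (!(i == grid.length - 1) || !(j == (grid.getD 0 []).length - 1)) &&
              ((grid.getD i []).getD j 0 == 1) then
            pvSet2 t i j ((decide (i < grid.length - 1) && pvGet2 false t (i+1) j) ||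
                          (decide (j < (grid.getD 0 []).length - 1) && pvGet2 false t i (j+1)))
          else t) t)
      (pvSet2 (List.replicate grid.length (List.replicate (grid.getD 0 []).length false))
        (grid.length - 1) ((grid.getD 0 []).length - 1) true)
    = pvMk grid.length (grid.getD 0 []).length
        (pvB1 (fun i j => (grid.getD i []).getD j 0) grid.length (grid.getD 0 []).length) := by
  have hinit : pvSet2 (List.replicate grid.length
        (List.replicate (grid.getD 0 []).length false))
        (grid.length - 1) ((grid.getD 0 []).length - 1) true
      = pvMk grid.length (grid.getD 0 []).length
          (pvInitSB grid.length (grid.getD 0 []).length) := by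
    rw [pvRepl_eq_pvMk, pvSet2_pvMk _ _ (by omega) (by omega)]
    apply pvMk_congr; intro p q hp hq
    simp [pvInitSB]
  rw [hinit]
  have hfill := pvFillBwd grid.length (grid.getD 0 []).length
    (pvFBb2 (fun i j => (grid.getD i []).getD j 0) grid.length (grid.getD 0 []).length)
    (pvInitSB grid.length (grid.getD 0 []).length) false
    (fun t i j =>
      if (!(i == grid.length - 1) || !(j == (grid.getD 0 []).length - 1)) &&
          ((grid.getD i []).getD j 0 == 1) then
        pvSet2 t i j ((decide (i < grid.length - 1) && pvGet2 false t (i+1) j) ||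
                      (decide (j < (grid.getD 0 []).length - 1) && pvGet2 false t i (j+1)))
      else t) ?_
  · rw [hfill]
    apply pvMk_congr; intro p q hp hq
    exact pvB2_eq_pvB1 (fun i j => (grid.getD i []).getD j 0) grid.length
      (grid.getD 0 []).length p q
  · intro h i j hi hj
    dsimp only
    by_cases hcnd : ((!(i == grid.length - 1) || !(j == (grid.getD 0 []).length - 1)) &&
        ((grid.getD i []).getD j 0 == 1)) = true
    · rw [if_pos hcnd]
      have hup : (decide (i < grid.length - 1) &&
            pvGet2 false (pvMk grid.length (grid.getD 0 []).length h) (i+1) j)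
          = (decide (i < grid.length - 1) &&
            (if i + 1 < grid.length then h (i+1) j else false)) := by
        by_cases hi0 : i + 1 < grid.length
        · rw [if_pos hi0, pvGet2_pvMk false _ (by omega) hj]
        · rw [if_neg hi0, pvGet2_pvMk_oob_row false _ _ (by omega)]
      have hright : (decide (j < (grid.getD 0 []).length - 1) &&
            pvGet2 false (pvMk grid.length (grid.getD 0 []).length h) i (j+1))
          = (decide (j < (grid.getD 0 []).length - 1) &&
            (if j + 1 < (grid.getD 0 []).length then h i (j+1) else false)) := by
        by_cases hj0 : j + 1 < (grid.getD 0 []).length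
        · rw [if_pos hj0, pvGet2_pvMk false _ hi (by omega)]
        · rw [if_neg hj0, pvGet2_pvMk_oob_col false _ _ (by omega)]
      rw [hup, hright, pvSet2_pvMk _ _ hi hj]
      apply pvMk_congr; intro p q hp hq
      by_cases hc : p = i ∧ q = j
      · rw [if_pos hc, if_pos hc]
        simp only [pvFBb2, if_pos hcnd]
      · rw [if_neg hc, if_neg hc]
    · rw [if_neg hcnd]
      apply pvMk_congr; intro p q hp hq
      by_cases hc : p = i ∧ q = j
      · rw [if_pos hc]
        simp only [pvFBb2, if_neg hcnd]
        rw [hc.1, hc.2]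
      · rw [if_neg hc]


-- ---------- arithmetic facts about the specifications ----------

theorem pvA1_eq (g : Nat → Nat → Int) (i j : Nat) :
    pvA1 g i j = pvFA g i j (pvInit1 i j)
      (if i = 0 then 0 else pvA1 g (i-1) j) (if j = 0 then 0 else pvA1 g i (j-1)) := by
  unfold pvA1; exact pvSpecF_eq _ _ _ i j

theorem pvA2_eq (g : Nat → Nat → Int) (R C i j : Nat) :
    pvA2 g R C i j = pvFA g i j (pvInit2 R C i j)
      (if i + 1 < R then pvA2 g R C (i+1) j else 0)
      (if j + 1 < C then pvA2 g R C i (j+1) else 0) := by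
  unfold pvA2; exact pvSpecB_eq _ _ _ _ _ i j

theorem pvInit1_nonneg (i j : Nat) : 0 ≤ pvInit1 i j := by
  unfold pvInit1; split <;> norm_num

theorem pvInit2_nonneg (R C i j : Nat) : 0 ≤ pvInit2 R C i j := by
  unfold pvInit2; split <;> norm_num

theorem pvA1_nonneg_aux (g : Nat → Nat → Int) :
    ∀ n i j, i + j ≤ n → 0 ≤ pvA1 g i j := by
  intro n
  induction n with
  | zero =>
    intro i j h
    rw [pvA1_eq]
    have hi : i = 0 := by omega
    have hj : j = 0 := by omega
    subst hi; subst hj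
    unfold pvFA
    split
    · simpa using pvInit1_nonneg 0 0
    · exact pvInit1_nonneg 0 0
  | succ n ih =>
    intro i j h
    rw [pvA1_eq]
    have hup : 0 ≤ (if i = 0 then (0:Int) else pvA1 g (i-1) j) := by
      split
      · exact le_refl 0
      · exact ih (i-1) j (by omega)
    have hleft : 0 ≤ (if j = 0 then (0:Int) else pvA1 g i (j-1)) := by
      split
      · exact le_refl 0
      · exact ih i (j-1) (by omega)
    unfold pvFA
    split
    · exact add_nonneg (add_nonneg (pvInit1_nonneg i j) hup) hleft
    · exact pvInit1_nonneg i j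

theorem pvA1_nonneg (g : Nat → Nat → Int) (i j : Nat) : 0 ≤ pvA1 g i j :=
  pvA1_nonneg_aux g (i+j) i j le_rfl

theorem pvA2_nonneg_aux (g : Nat → Nat → Int) (R C : Nat) :
    ∀ n i j, R - i + (C - j) ≤ n → 0 ≤ pvA2 g R C i j := by
  intro n
  induction n with
  | zero =>
    intro i j h
    rw [pvA2_eq]
    rw [if_neg (by omega), if_neg (by omega)]
    unfold pvFA
    split
    · simpa using pvInit2_nonneg R C i j
    · exact pvInit2_nonneg R C i j
  | succ n ih =>
    intro i j h
    rw [pvA2_eq]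
    have hup : 0 ≤ (if i + 1 < R then pvA2 g R C (i+1) j else (0:Int)) := by
      split
      · exact ih (i+1) j (by omega)
      · exact le_refl 0
    have hright : 0 ≤ (if j + 1 < C then pvA2 g R C i (j+1) else (0:Int)) := by
      split
      · exact ih i (j+1) (by omega)
      · exact le_refl 0
    unfold pvFA
    split
    · exact add_nonneg (add_nonneg (pvInit2_nonneg R C i j) hup) hright
    · exact pvInit2_nonneg R C i j

theorem pvA2_nonneg (g : Nat → Nat → Int) (R C i j : Nat) : 0 ≤ pvA2 g R C i j :=
  pvA2_nonneg_aux g R C (R - i + (C - j)) i j le_rfl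

-- the boolean forward table is exactly positivity of the count table
theorem pvF1_decide_aux (g : Nat → Nat → Int) :
    ∀ n i j, i + j ≤ n → pvF1 g i j = decide (0 < pvA1 g i j) := by
  intro n
  induction n with
  | zero =>
    intro i j h
    have hi : i = 0 := by omega
    have hj : j = 0 := by omega
    subst hi; subst hj
    rw [pvF1_eq, pvA1_eq]
    unfold pvFBf pvFA pvInit1
    simp
  | succ n ih =>
    intro i j h
    by_cases hc0 : i = 0 ∧ j = 0
    · obtain ⟨rfl, rfl⟩ := hc0
      rw [pvF1_eq, pvA1_eq]
      unfold pvFBf pvFA pvInit1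
      simp
    · rw [pvF1_eq, pvA1_eq]
      unfold pvFBf pvFA pvInit1
      rw [if_neg hc0, if_neg hc0]
      by_cases hg : g i j == 1
      · rw [if_pos hg, if_pos hg]
        have hup1 : 0 ≤ (if i = 0 then (0:Int) else pvA1 g (i-1) j) := by
          split
          · exact le_refl 0
          · exact pvA1_nonneg g (i-1) j
        have hleft1 : 0 ≤ (if j = 0 then (0:Int) else pvA1 g i (j-1)) := by
          split
          · exact le_refl 0
          · exact pvA1_nonneg g i (j-1)
        have e1 : (decide (0 < i) && (if i = 0 then false else pvF1 g (i-1) j))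
            = decide (0 < (if i = 0 then (0:Int) else pvA1 g (i-1) j)) := by
          by_cases hi0 : i = 0
          · simp [hi0]
          · rw [if_neg hi0, if_neg hi0, ih (i-1) j (by omega)]
            simp [Nat.pos_of_ne_zero hi0]
        have e2 : (decide (0 < j) && (if j = 0 then false else pvF1 g i (j-1)))
            = decide (0 < (if j = 0 then (0:Int) else pvA1 g i (j-1))) := by
          by_cases hj0 : j = 0
          · simp [hj0]
          · rw [if_neg hj0, if_neg hj0, ih i (j-1) (by omega)]
            simp [Nat.pos_of_ne_zero hj0]
        rw [e1, e2]
        rw [Bool.eq_iff_iff]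
        simp only [Bool.or_eq_true, decide_eq_true_eq]
        omega
      · rw [if_neg hg, if_neg hg]
        simp

theorem pvF1_decide (g : Nat → Nat → Int) (i j : Nat) :
    pvF1 g i j = decide (0 < pvA1 g i j) :=
  pvF1_decide_aux g (i+j) i j le_rfl

-- the boolean backward table is exactly positivity of the backward count table
theorem pvB1_decide_aux (g : Nat → Nat → Int) (R C : Nat) :
    ∀ n i j, R - i + (C - j) ≤ n → pvB1 g R C i j = decide (0 < pvA2 g R C i j) := by
  intro n
  induction n with
  | zero =>
    intro i j h
    rw [pvB1_eq, pvA2_eq]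
    unfold pvFBb pvFA pvInit2
    have hnR : ¬ (i + 1 < R) := by omega
    have hnC : ¬ (j + 1 < C) := by omega
    simp only [if_neg hnR, if_neg hnC]
    by_cases hc0 : i = R - 1 ∧ j = C - 1
    · rw [if_pos hc0, if_pos hc0]
      split <;> norm_num
    · rw [if_neg hc0, if_neg hc0]
      by_cases hg : g i j == 1
      · rw [if_pos hg, if_pos hg]
        simp
      · rw [if_neg hg, if_neg hg]
        simp
  | succ n ih =>
    intro i j h
    rw [pvB1_eq, pvA2_eq]
    unfold pvFBb pvFA pvInit2
    by_cases hc0 : i = R - 1 ∧ j = C - 1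
    · rw [if_pos hc0, if_pos hc0]
      have hup : 0 ≤ (if i + 1 < R then pvA2 g R C (i+1) j else (0:Int)) := by
        split
        · exact pvA2_nonneg g R C (i+1) j
        · exact le_refl 0
      have hright : 0 ≤ (if j + 1 < C then pvA2 g R C i (j+1) else (0:Int)) := by
        split
        · exact pvA2_nonneg g R C i (j+1)
        · exact le_refl 0
      split
      · have hpos : (0:Int) < (1 + (if i + 1 < R then pvA2 g R C (i+1) j else 0))
            + (if j + 1 < C then pvA2 g R C i (j+1) else 0) := by omega
        simp [hpos]
      · norm_num
    · rw [if_neg hc0, if_neg hc0]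
      by_cases hg : g i j == 1
      · rw [if_pos hg, if_pos hg]
        have hup1 : 0 ≤ (if i + 1 < R then pvA2 g R C (i+1) j else (0:Int)) := by
          split
          · exact pvA2_nonneg g R C (i+1) j
          · exact le_refl 0
        have hright1 : 0 ≤ (if j + 1 < C then pvA2 g R C i (j+1) else (0:Int)) := by
          split
          · exact pvA2_nonneg g R C i (j+1)
          · exact le_refl 0
        have e1 : (decide (i < R - 1) && (if i + 1 < R then pvB1 g R C (i+1) j else false))
            = decide (0 < (if i + 1 < R then pvA2 g R C (i+1) j else (0:Int))) := by
          by_cases hi0 : i + 1 < R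
          · rw [if_pos hi0, if_pos hi0, ih (i+1) j (by omega)]
            simp [show i < R - 1 by omega]
          · rw [if_neg hi0, if_neg hi0]
            simp [show ¬ (i < R - 1) by omega]
        have e2 : (decide (j < C - 1) && (if j + 1 < C then pvB1 g R C i (j+1) else false))
            = decide (0 < (if j + 1 < C then pvA2 g R C i (j+1) else (0:Int))) := by
          by_cases hj0 : j + 1 < C
          · rw [if_pos hj0, if_pos hj0, ih i (j+1) (by omega)]
            simp [show j < C - 1 by omega]
          · rw [if_neg hj0, if_neg hj0]
            simp [show ¬ (j < C - 1) by omega]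
        rw [e1, e2]
        rw [Bool.eq_iff_iff]
        simp only [Bool.or_eq_true, decide_eq_true_eq]
        omega
      · rw [if_neg hg, if_neg hg]
        simp

theorem pvB1_decide (g : Nat → Nat → Int) (R C i j : Nat) :
    pvB1 g R C i j = decide (0 < pvA2 g R C i j) :=
  pvB1_decide_aux g R C (R - i + (C - j)) i j le_rfl


-- ---------- antidiagonal sums: the product of the two counts, summed along an
-- interior antidiagonal, is the total number of paths ----------

def pvD (g : Nat → Nat → Int) (R C i d : Nat) : Int :=
  if i ≤ d ∧ d - i < C then pvA1 g i (d-i) * pvA2 g R C i (d-i) else 0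

def pvS (g : Nat → Nat → Int) (R C d : Nat) : Int :=
  ∑ i ∈ Finset.range R, pvD g R C i d

theorem pvA2_end (g : Nat → Nat → Int) (R C : Nat) (hR : 1 ≤ R) (hC : 1 ≤ C) :
    pvA2 g R C (R-1) (C-1) = 1 := by
  rw [pvA2_eq]
  unfold pvFA pvInit2
  rw [if_neg (by omega : ¬ (R - 1 + 1 < R)), if_neg (by omega : ¬ (C - 1 + 1 < C)),
    if_pos (⟨rfl, rfl⟩ : R - 1 = R - 1 ∧ C - 1 = C - 1)]
  split <;> ring

theorem pvA1_expand (g : Nat → Nat → Int) (i j : Nat) (h0 : ¬ (i = 0 ∧ j = 0)) :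
    pvA1 g i j = if g i j == 1 then
      (if i = 0 then 0 else pvA1 g (i-1) j) + (if j = 0 then 0 else pvA1 g i (j-1)) else 0 := by
  rw [pvA1_eq]
  unfold pvFA pvInit1
  rw [if_neg h0]
  split <;> ring

theorem pvA2_expand (g : Nat → Nat → Int) (R C i j : Nat) (h0 : ¬ (i = R-1 ∧ j = C-1)) :
    pvA2 g R C i j = if g i j == 1 then
      (if i + 1 < R then pvA2 g R C (i+1) j else 0)
        + (if j + 1 < C then pvA2 g R C i (j+1) else 0) else 0 := by
  rw [pvA2_eq]
  unfold pvFA pvInit2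
  rw [if_neg h0]
  split <;> ring

theorem pvShift (R : Nat) (u : Nat → Int) :
    ∑ i ∈ Finset.range R, (if i + 1 < R then u (i+1) else 0)
      = ∑ i ∈ Finset.range R, (if 1 ≤ i then u i else 0) := by
  cases R with
  | zero => simp
  | succ n =>
    rw [Finset.sum_range_succ, Finset.sum_range_succ']
    rw [if_neg (by omega : ¬ (n + 1 < n + 1)), if_neg (by omega : ¬ (1 ≤ 0))]
    simp only [add_zero]
    apply Finset.sum_congr rfl
    intro i hi
    have hi' : i < n := Finset.mem_range.mp hi
    rw [if_pos (by omega : i + 1 < n + 1), if_pos (by omega : 1 ≤ i + 1)]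

theorem pvS_transfer (g : Nat → Nat → Int) (R C : Nat) (hg : g (R-1) (C-1) == 1)
    (d : Nat) (hd1 : 1 ≤ d) (hd2 : d + 1 ≤ R + C - 2) (hR : 1 ≤ R) (hC : 1 ≤ C) :
    pvS g R C d = pvS g R C (d+1) := by
  set u : Nat → Int := fun t =>
    if 1 ≤ t ∧ t ≤ d + 1 ∧ d + 1 - t < C then
      pvA1 g (t-1) (d+1-t) * pvA2 g R C t (d+1-t) else 0 with hu
  have hstep1 : ∀ i, i < R → pvD g R C i d
      = (if i ≤ d ∧ d - i < C ∧ i + 1 < R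
            then pvA1 g i (d-i) * pvA2 g R C (i+1) (d-i) else 0)
        + (if i ≤ d ∧ d - i + 1 < C
            then pvA1 g i (d-i) * pvA2 g R C i (d-i+1) else 0) := by
    intro i hiR
    unfold pvD
    by_cases hb : i ≤ d ∧ d - i < C
    · rw [if_pos hb]
      have hne : ¬ (i = R - 1 ∧ d - i = C - 1) := by omega
      by_cases hgij : g i (d-i) == 1
      · rw [pvA2_expand g R C i (d-i) hne, if_pos hgij, mul_add]
        congr 1
        · by_cases hiR1 : i + 1 < R
          · rw [if_pos hiR1, if_pos ⟨hb.1, hb.2, hiR1⟩]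
          · rw [if_neg hiR1, if_neg (by omega : ¬ (i ≤ d ∧ d - i < C ∧ i + 1 < R)), mul_zero]
        · by_cases hjC1 : d - i + 1 < C
          · rw [if_pos hjC1, if_pos ⟨hb.1, hjC1⟩]
          · rw [if_neg hjC1, if_neg (by omega : ¬ (i ≤ d ∧ d - i + 1 < C)), mul_zero]
      · have h00 : ¬ (i = 0 ∧ d - i = 0) := by omega
        have ha1 : pvA1 g i (d-i) = 0 := by
          rw [pvA1_expand g i (d-i) h00, if_neg hgij]
        rw [ha1]
        simp
    · rw [if_neg hb, if_neg (by omega : ¬ (i ≤ d ∧ d - i < C ∧ i + 1 < R)),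
        if_neg (by omega : ¬ (i ≤ d ∧ d - i + 1 < C))]
      norm_num
  have hstep2 : ∀ i, i < R → pvD g R C i (d+1)
      = (if 1 ≤ i then u i else 0)
        + (if i ≤ d ∧ d - i + 1 < C
            then pvA1 g i (d-i) * pvA2 g R C i (d-i+1) else 0) := by
    intro i hiR
    unfold pvD
    by_cases hb : i ≤ d + 1 ∧ d + 1 - i < C
    · rw [if_pos hb]
      have h00 : ¬ (i = 0 ∧ d + 1 - i = 0) := by omega
      by_cases hgij : g i (d+1-i) == 1
      · rw [pvA1_expand g i (d+1-i) h00, if_pos hgij, add_mul]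
        congr 1
        · by_cases hi1 : i = 0
          · rw [if_pos hi1, zero_mul, if_neg (by omega : ¬ (1 ≤ i))]
          · rw [if_neg hi1, if_pos (by omega : 1 ≤ i)]
            have huv : u i = pvA1 g (i-1) (d+1-i) * pvA2 g R C i (d+1-i) := by
              simp only [hu]
              exact if_pos ⟨by omega, hb.1, hb.2⟩
            rw [huv]
        · by_cases hj1 : d + 1 - i = 0
          · rw [if_pos hj1, zero_mul, if_neg (by omega : ¬ (i ≤ d ∧ d - i + 1 < C))]
          · rw [if_neg hj1, if_pos (show i ≤ d ∧ d - i + 1 < C by omega)]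
            have e1 : d + 1 - i - 1 = d - i := by omega
            have e2 : d - i + 1 = d + 1 - i := by omega
            rw [e1, e2]
      · have hne : ¬ (i = R - 1 ∧ d + 1 - i = C - 1) := by
          intro hh
          have hcopy := hg
          rw [← hh.1, ← hh.2] at hcopy
          exact hgij hcopy
        have ha2 : pvA2 g R C i (d+1-i) = 0 := by
          rw [pvA2_expand g R C i (d+1-i) hne, if_neg hgij]
        rw [ha2, mul_zero]
        have hu0 : u i = 0 := by
          simp only [hu]
          split
          · rw [ha2, mul_zero]
          · rfl
        have hY0 : (if i ≤ d ∧ d - i + 1 < C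
            then pvA1 g i (d-i) * pvA2 g R C i (d-i+1) else 0) = 0 := by
          split
          · have e2 : d - i + 1 = d + 1 - i := by omega
            rw [e2, ha2, mul_zero]
          · rfl
        rw [hu0, hY0]
        simp
    · rw [if_neg hb]
      have hu0 : (if 1 ≤ i then u i else 0) = 0 := by
        split
        · simp only [hu]; exact if_neg (by omega)
        · rfl
      rw [hu0, if_neg (by omega : ¬ (i ≤ d ∧ d - i + 1 < C))]
      norm_num
  have hX : ∀ i, i < R →
      (if i ≤ d ∧ d - i < C ∧ i + 1 < R
          then pvA1 g i (d-i) * pvA2 g R C (i+1) (d-i) else 0)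
        = (if i + 1 < R then u (i+1) else 0) := by
    intro i hiR
    by_cases hiR1 : i + 1 < R
    · rw [if_pos hiR1]
      simp only [hu]
      have e1 : i + 1 - 1 = i := by omega
      have e2 : d + 1 - (i + 1) = d - i := by omega
      rw [e1, e2]
      by_cases hb : i ≤ d ∧ d - i < C
      · rw [if_pos ⟨hb.1, hb.2, hiR1⟩, if_pos ⟨by omega, by omega, hb.2⟩]
      · rw [if_neg (by omega : ¬ (i ≤ d ∧ d - i < C ∧ i + 1 < R)),
          if_neg (by omega : ¬ (1 ≤ i + 1 ∧ i + 1 ≤ d + 1 ∧ d - i < C))]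
    · rw [if_neg hiR1, if_neg (by omega : ¬ (i ≤ d ∧ d - i < C ∧ i + 1 < R))]
  calc pvS g R C d
      = ∑ i ∈ Finset.range R,
          ((if i + 1 < R then u (i+1) else 0)
            + (if i ≤ d ∧ d - i + 1 < C
                then pvA1 g i (d-i) * pvA2 g R C i (d-i+1) else 0)) := by
        unfold pvS
        apply Finset.sum_congr rfl
        intro i hi
        rw [hstep1 i (Finset.mem_range.mp hi), hX i (Finset.mem_range.mp hi)]
    _ = (∑ i ∈ Finset.range R, (if i + 1 < R then u (i+1) else 0))
          + ∑ i ∈ Finset.range R, (if i ≤ d ∧ d - i + 1 < C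
              then pvA1 g i (d-i) * pvA2 g R C i (d-i+1) else 0) := by
        rw [Finset.sum_add_distrib]
    _ = (∑ i ∈ Finset.range R, (if 1 ≤ i then u i else 0))
          + ∑ i ∈ Finset.range R, (if i ≤ d ∧ d - i + 1 < C
              then pvA1 g i (d-i) * pvA2 g R C i (d-i+1) else 0) := by
        rw [pvShift]
    _ = pvS g R C (d+1) := by
        unfold pvS
        rw [← Finset.sum_add_distrib]
        apply Finset.sum_congr rfl
        intro i hi
        rw [hstep2 i (Finset.mem_range.mp hi)]

theorem pvS_base (g : Nat → Nat → Int) (R C : Nat) (hR : 1 ≤ R) (hC : 1 ≤ C) :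
    pvS g R C (R+C-2) = pvA1 g (R-1) (C-1) := by
  unfold pvS
  rw [Finset.sum_eq_single_of_mem (R-1) (Finset.mem_range.mpr (by omega))]
  · unfold pvD
    rw [if_pos (show R - 1 ≤ R + C - 2 ∧ R + C - 2 - (R-1) < C by omega)]
    have e : R + C - 2 - (R-1) = C - 1 := by omega
    rw [e, pvA2_end g R C hR hC, mul_one]
  · intro b hb hne
    unfold pvD
    rw [if_neg (by
      have := Finset.mem_range.mp hb
      omega)]

theorem pvS_const_aux (g : Nat → Nat → Int) (R C : Nat) (hg : g (R-1) (C-1) == 1)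
    (hR : 1 ≤ R) (hC : 1 ≤ C) :
    ∀ k d, 1 ≤ d → d ≤ R + C - 2 → R + C - 2 - d ≤ k →
      pvS g R C d = pvA1 g (R-1) (C-1) := by
  intro k
  induction k with
  | zero =>
    intro d h1 h2 h3
    have hd : d = R + C - 2 := by omega
    rw [hd]
    exact pvS_base g R C hR hC
  | succ k ih =>
    intro d h1 h2 h3
    by_cases hd : d = R + C - 2
    · rw [hd]; exact pvS_base g R C hR hC
    · rw [pvS_transfer g R C hg d h1 (by omega) hR hC]
      exact ih (d+1) (by omega) (by omega) (by omega)

theorem pvS_const (g : Nat → Nat → Int) (R C : Nat) (hg : g (R-1) (C-1) == 1)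
    (hR : 1 ≤ R) (hC : 1 ≤ C) (d : Nat) (h1 : 1 ≤ d) (h2 : d ≤ R + C - 2) :
    pvS g R C d = pvA1 g (R-1) (C-1) :=
  pvS_const_aux g R C hg hR hC (R + C - 2 - d) d h1 h2 le_rfl


-- ---------- per-antidiagonal counting equivalence ----------

theorem pvProd_pos_iff (a b : Int) (ha : 0 ≤ a) (hb : 0 ≤ b) :
    0 < a * b ↔ 0 < a ∧ 0 < b := by
  constructor
  · intro h
    constructor
    · rcases lt_or_eq_of_le ha with h1 | h1
      · exact h1
      · exfalso; rw [← h1, zero_mul] at h; exact lt_irrefl 0 h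
    · rcases lt_or_eq_of_le hb with h1 | h1
      · exact h1
      · exfalso; rw [← h1, mul_zero] at h; exact lt_irrefl 0 h
  · intro ⟨h1, h2⟩; exact mul_pos h1 h2

theorem pvD_nonneg (g : Nat → Nat → Int) (R C i d : Nat) : 0 ≤ pvD g R C i d := by
  unfold pvD
  split
  · exact mul_nonneg (pvA1_nonneg g _ _) (pvA2_nonneg g R C _ _)
  · exact le_refl 0

theorem pvD_pos_iff (g : Nat → Nat → Int) (R C i d : Nat) :
    0 < pvD g R C i d
      ↔ i ≤ d ∧ d - i < C ∧ 0 < pvA1 g i (d-i) ∧ 0 < pvA2 g R C i (d-i) := by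
  unfold pvD
  split
  · rename_i hb
    rw [pvProd_pos_iff _ _ (pvA1_nonneg g _ _) (pvA2_nonneg g R C _ _)]
    constructor
    · intro ⟨h1, h2⟩; exact ⟨hb.1, hb.2, h1, h2⟩
    · intro ⟨_, _, h1, h2⟩; exact ⟨h1, h2⟩
  · rename_i hb
    constructor
    · intro h; exact absurd rfl (ne_of_lt h)
    · intro ⟨h1, h2, _, _⟩; exact absurd ⟨h1, h2⟩ hb

-- on an interior antidiagonal whose product-sum is the total, a critical cell
-- exists iff at most one cell of the diagonal carries a positive product
theorem pvDiag_iff (g : Nat → Nat → Int) (R C d : Nat) (hR : 1 ≤ R) (hC : 1 ≤ C)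
    (hd2 : d ≤ R + C - 2)
    (hS : pvS g R C d = pvA1 g (R-1) (C-1)) :
    (∃ i, i < R ∧ i ≤ d ∧ d - i < C ∧
        pvA1 g i (d-i) * pvA2 g R C i (d-i) = pvA1 g (R-1) (C-1))
      ↔ ((Finset.range R).filter (fun i => i ≤ d ∧ d - i < C ∧
            0 < pvA1 g i (d-i) ∧ 0 < pvA2 g R C i (d-i))).card ≤ 1 := by
  constructor
  · rintro ⟨i0, hi0R, hi0d, hi0C, hprod⟩
    have hD0 : pvD g R C i0 d = pvA1 g (R-1) (C-1) := by
      unfold pvD; rw [if_pos ⟨hi0d, hi0C⟩]; exact hprod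
    have hsplit := Finset.add_sum_erase (Finset.range R) (fun b => pvD g R C b d)
      (Finset.mem_range.mpr hi0R)
    have hzero : ∀ b ∈ (Finset.range R).erase i0, pvD g R C b d = 0 := by
      rw [← Finset.sum_eq_zero_iff_of_nonneg (fun b _ => pvD_nonneg g R C b d)]
      have : pvD g R C i0 d + ∑ b ∈ (Finset.range R).erase i0, pvD g R C b d
          = pvA1 g (R-1) (C-1) := by
        rw [hsplit]; exact hS
      rw [hD0] at this
      omega
    apply Finset.card_le_one.mpr
    have hkey : ∀ a ∈ (Finset.range R).filter (fun i => i ≤ d ∧ d - i < C ∧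
        0 < pvA1 g i (d-i) ∧ 0 < pvA2 g R C i (d-i)), a = i0 := by
      intro a ha
      rw [Finset.mem_filter] at ha
      by_contra hne
      have hmem : a ∈ (Finset.range R).erase i0 := Finset.mem_erase.mpr ⟨hne, ha.1⟩
      have h0 := hzero a hmem
      have hpos : 0 < pvD g R C a d := (pvD_pos_iff g R C a d).mpr ha.2
      omega
    intro a ha b hb
    rw [hkey a ha, hkey b hb]
  · intro hcard
    by_cases hF : ((Finset.range R).filter (fun i => i ≤ d ∧ d - i < C ∧
        0 < pvA1 g i (d-i) ∧ 0 < pvA2 g R C i (d-i))) = ∅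
    · -- no on-path cell at all: the total is 0 and any cell of the diagonal is critical
      have hall : ∀ i ∈ Finset.range R, pvD g R C i d = 0 := by
        intro i hi
        by_contra hne
        have hpos : 0 < pvD g R C i d :=
          lt_of_le_of_ne (pvD_nonneg g R C i d) (Ne.symm hne)
        have hmem : i ∈ (Finset.range R).filter (fun i => i ≤ d ∧ d - i < C ∧
            0 < pvA1 g i (d-i) ∧ 0 < pvA2 g R C i (d-i)) :=
          Finset.mem_filter.mpr ⟨hi, (pvD_pos_iff g R C i d).mp hpos⟩
        rw [hF] at hmem
        exact absurd hmem (Finset.notMem_empty i)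
      have hT0 : pvA1 g (R-1) (C-1) = 0 := by
        rw [← hS]
        exact Finset.sum_eq_zero hall
      refine ⟨min (R-1) d, by omega, by omega, by omega, ?_⟩
      have h := hall (min (R-1) d) (Finset.mem_range.mpr (by omega))
      unfold pvD at h
      rw [if_pos (by omega : min (R-1) d ≤ d ∧ d - min (R-1) d < C)] at h
      rw [h, hT0]
    · obtain ⟨i0, hi0F⟩ := Finset.nonempty_iff_ne_empty.mpr hF
      have hone : ∀ a ∈ (Finset.range R).filter (fun i => i ≤ d ∧ d - i < C ∧
          0 < pvA1 g i (d-i) ∧ 0 < pvA2 g R C i (d-i)), a = i0 :=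
        fun a ha => Finset.card_le_one.mp hcard a ha i0 hi0F
      have hi0 := Finset.mem_filter.mp hi0F
      have hi0R := Finset.mem_range.mp hi0.1
      have hzero : ∀ b ∈ (Finset.range R).erase i0, pvD g R C b d = 0 := by
        intro b hb
        rw [Finset.mem_erase] at hb
        by_contra hne
        have hpos : 0 < pvD g R C b d :=
          lt_of_le_of_ne (pvD_nonneg g R C b d) (Ne.symm hne)
        have hmem : b ∈ (Finset.range R).filter (fun i => i ≤ d ∧ d - i < C ∧
            0 < pvA1 g i (d-i) ∧ 0 < pvA2 g R C i (d-i)) :=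
          Finset.mem_filter.mpr ⟨hb.2, (pvD_pos_iff g R C b d).mp hpos⟩
        exact hb.1 (hone b hmem)
      have hsplit := Finset.add_sum_erase (Finset.range R) (fun b => pvD g R C b d)
        (Finset.mem_range.mpr hi0R)
      have hsum0 : ∑ b ∈ (Finset.range R).erase i0, pvD g R C b d = 0 :=
        Finset.sum_eq_zero hzero
      have hD0 : pvD g R C i0 d = pvA1 g (R-1) (C-1) := by
        have : pvD g R C i0 d + ∑ b ∈ (Finset.range R).erase i0, pvD g R C b d
            = pvA1 g (R-1) (C-1) := by rw [hsplit]; exact hS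
        rw [hsum0, add_zero] at this
        exact this
      refine ⟨i0, hi0R, hi0.2.1, hi0.2.2.1, ?_⟩
      unfold pvD at hD0
      rw [if_pos ⟨hi0.2.1, hi0.2.2.1⟩] at hD0
      exact hD0

-- when a path exists: A's critical-cell scan is equivalent to B's antidiagonal check
theorem pvMasterPos (g : Nat → Nat → Int) (R C : Nat) (hR : 1 ≤ R) (hC : 1 ≤ C)
    (hg : g (R-1) (C-1) == 1) :
    (∃ i, i < R ∧ ∃ j, j < C ∧ ¬ (i = 0 ∧ j = 0) ∧ ¬ (i = R-1 ∧ j = C-1) ∧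
        pvA1 g i j * pvA2 g R C i j = pvA1 g (R-1) (C-1))
    ↔ ∃ d, 1 ≤ d ∧ d ≤ R + C - 3 ∧
        ((Finset.range R).filter (fun i => i ≤ d ∧ d - i < C ∧
          0 < pvA1 g i (d-i) ∧ 0 < pvA2 g R C i (d-i))).card ≤ 1 := by
  constructor
  · rintro ⟨i, hiR, j, hjC, h00, hend, hprod⟩
    refine ⟨i + j, by omega, by omega, ?_⟩
    apply (pvDiag_iff g R C (i+j) hR hC (by omega)
      (pvS_const g R C hg hR hC (i+j) (by omega) (by omega))).mp
    refine ⟨i, hiR, by omega, by omega, ?_⟩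
    have e : i + j - i = j := by omega
    rw [e]
    exact hprod
  · rintro ⟨d, hd1, hd3, hcard⟩
    obtain ⟨i, hiR, hid, hiC, hprod⟩ := (pvDiag_iff g R C d hR hC (by omega)
      (pvS_const g R C hg hR hC d (by omega) (by omega))).mpr hcard
    exact ⟨i, hiR, d - i, hiC, by omega, by omega, hprod⟩

-- when no path exists (target = 0) but the end cell is 1, some non-corner cell has a
-- zero product, so A's scan succeeds
theorem pvNoPathScan (g : Nat → Nat → Int) (R C : Nat) (hR : 1 ≤ R) (hC : 1 ≤ C)
    (hg : g (R-1) (C-1) == 1) (hT0 : pvA1 g (R-1) (C-1) = 0) :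
    ∃ i, i < R ∧ ∃ j, j < C ∧ ¬ (i = 0 ∧ j = 0) ∧ ¬ (i = R-1 ∧ j = C-1) ∧
      pvA1 g i j * pvA2 g R C i j = 0 := by
  have hA00 : pvA1 g 0 0 = 1 := by
    rw [pvA1_eq]
    unfold pvFA pvInit1
    simp
  have h4 : R + C ≥ 4 := by
    by_contra hlt
    have hcases : (R = 1 ∧ C = 1) ∨ (R = 1 ∧ C = 2) ∨ (R = 2 ∧ C = 1) := by omega
    rcases hcases with ⟨hr, hc⟩ | ⟨hr, hc⟩ | ⟨hr, hc⟩
    · subst hr; subst hc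
      simp only [show (1:Nat) - 1 = 0 from rfl] at hT0
      omega
    · subst hr; subst hc
      simp only [show (1:Nat) - 1 = 0 from rfl, show (2:Nat) - 1 = 1 from rfl] at hT0 hg
      rw [pvA1_expand g 0 1 (by omega), if_pos hg] at hT0
      norm_num at hT0
      omega
    · subst hr; subst hc
      simp only [show (1:Nat) - 1 = 0 from rfl, show (2:Nat) - 1 = 1 from rfl] at hT0 hg
      rw [pvA1_expand g 1 0 (by omega), if_pos hg] at hT0
      norm_num at hT0
      omega
  have hS1 : pvS g R C 1 = 0 := by
    rw [pvS_const g R C hg hR hC 1 le_rfl (by omega), hT0]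
  have hterm : ∀ i, i < R → pvD g R C i 1 = 0 := by
    intro i hi
    have := (Finset.sum_eq_zero_iff_of_nonneg
      (fun b (_ : b ∈ Finset.range R) => pvD_nonneg g R C b 1)).mp hS1
    exact this i (Finset.mem_range.mpr hi)
  by_cases hC2 : 2 ≤ C
  · refine ⟨0, by omega, 1, by omega, by omega, by omega, ?_⟩
    have h := hterm 0 (by omega)
    unfold pvD at h
    rw [if_pos (by omega : (0:Nat) ≤ 1 ∧ 1 - 0 < C)] at h
    exact h
  · have hc1 : C = 1 := by omega
    have hr3 : 3 ≤ R := by omega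
    refine ⟨1, by omega, 0, by omega, by omega, by omega, ?_⟩
    have h := hterm 1 (by omega)
    unfold pvD at h
    rw [if_pos (by omega : (1:Nat) ≤ 1 ∧ 1 - 1 < C)] at h
    exact h


-- ---------- bridging the ports' boolean scans to the master propositions ----------

theorem pvScanA_iff (R C : Nat) (t1 t2 : Nat → Nat → Int) (tg : Int) :
    ((List.range R).any (fun i => (List.range C).any (fun j =>
      ((!(i == 0) || !(j == 0)) && (!(i == R-1) || !(j == C-1))) &&
        (pvGet2 0 (pvMk R C t1) i j * pvGet2 0 (pvMk R C t2) i j == tg))) = true)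
    ↔ ∃ i, i < R ∧ ∃ j, j < C ∧ ¬ (i = 0 ∧ j = 0) ∧ ¬ (i = R-1 ∧ j = C-1) ∧
        t1 i j * t2 i j = tg := by
  rw [List.any_eq_true]
  constructor
  · rintro ⟨i, hi, h2⟩
    rw [List.mem_range] at hi
    rw [List.any_eq_true] at h2
    obtain ⟨j, hj, h3⟩ := h2
    rw [List.mem_range] at hj
    rw [pvGet2_pvMk 0 _ hi hj, pvGet2_pvMk 0 _ hi hj] at h3
    simp only [Bool.and_eq_true, Bool.or_eq_true, Bool.not_eq_true', beq_iff_eq,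
      beq_eq_false_iff_ne] at h3
    exact ⟨i, hi, j, hj, by tauto, by tauto, h3.2⟩
  · rintro ⟨i, hi, j, hj, h1, h2, h3⟩
    refine ⟨i, List.mem_range.mpr hi, ?_⟩
    rw [List.any_eq_true]
    refine ⟨j, List.mem_range.mpr hj, ?_⟩
    rw [pvGet2_pvMk 0 _ hi hj, pvGet2_pvMk 0 _ hi hj]
    simp only [Bool.and_eq_true, Bool.or_eq_true, Bool.not_eq_true', beq_iff_eq,
      beq_eq_false_iff_ne]
    exact ⟨⟨by tauto, by tauto⟩, h3⟩

theorem pvFoldCount (p : Nat → Bool) : ∀ (l : List Nat) (n : Nat),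
    l.foldl (fun cnt i => if p i then cnt + 1 else cnt) n = n + l.countP p := by
  intro l
  induction l with
  | nil => intro n; simp
  | cons a t ih =>
    intro n
    simp only [List.foldl_cons, List.countP_cons]
    cases h : p a <;> simp [h, ih] <;> omega

theorem pvCount_card (n : Nat) (p : Nat → Prop) [DecidablePred p] :
    (List.range n).countP (fun i => decide (p i)) = ((Finset.range n).filter p).card := by
  induction n with
  | zero => simp
  | succ m ih =>
    rw [List.range_succ, List.countP_append, Finset.range_add_one, Finset.filter_insert]
    by_cases h : p m
    · rw [if_pos h, Finset.card_insert_of_notMem (by simp)]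
      simp [h, ih]
    · rw [if_neg h]
      simp [h, ih]

theorem pvPredD_eq (R C d : Nat) (t1 t2 : Nat → Nat → Bool) (i : Nat) (hiR : i < R) :
    (((decide (0 ≤ (d:Int) - (i:Int)) &&
        decide ((d:Int) - (i:Int) < (C:Int))) &&
        pvGet2 false (pvMk R C t1) i ((d:Int) - (i:Int)).toNat) &&
         pvGet2 false (pvMk R C t2) i ((d:Int) - (i:Int)).toNat)
    = decide (i ≤ d ∧ d - i < C ∧ t1 i (d-i) = true ∧ t2 i (d-i) = true) := by
  by_cases hid : i ≤ d
  · have htn : ((d:Int) - (i:Int)).toNat = d - i := by omega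
    rw [htn]
    by_cases hc : d - i < C
    · rw [pvGet2_pvMk false _ hiR hc, pvGet2_pvMk false _ hiR hc]
      rw [Bool.eq_iff_iff]
      simp only [Bool.and_eq_true, decide_eq_true_eq]
      constructor
      · rintro ⟨⟨⟨_, _⟩, h3⟩, h4⟩; exact ⟨hid, hc, h3, h4⟩
      · rintro ⟨_, _, h3, h4⟩; exact ⟨⟨⟨by omega, by omega⟩, h3⟩, h4⟩
    · rw [pvGet2_pvMk_oob_col false _ _ (by omega), pvGet2_pvMk_oob_col false _ _ (by omega)]
      rw [Bool.eq_iff_iff]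
      simp only [Bool.and_eq_true, decide_eq_true_eq]
      constructor
      · rintro ⟨⟨_, h3⟩, _⟩; exact absurd h3 (by simp)
      · rintro ⟨_, hc2, _, _⟩; exact absurd hc2 hc
  · rw [Bool.eq_iff_iff]
    simp only [Bool.and_eq_true, decide_eq_true_eq]
    constructor
    · rintro ⟨⟨⟨h1, _⟩, _⟩, _⟩; omega
    · rintro ⟨h1, _⟩; omega

theorem pvScanD_iff (R C : Nat) (t1 t2 : Nat → Nat → Bool) :
    ((List.range' 1 (R + C - 3)).any (fun d =>
      ((List.range R).foldl (fun cnt (i : Nat) =>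
          let j : Int := (d : Int) - (i : Int)
          if 0 ≤ j && j < (C : Int) && pvGet2 false (pvMk R C t1) i j.toNat
              && pvGet2 false (pvMk R C t2) i j.toNat
          then cnt + 1 else cnt) (0:Nat)) ≤ 1) = true)
    ↔ ∃ d, 1 ≤ d ∧ d ≤ R + C - 3 ∧
        ((Finset.range R).filter (fun i => i ≤ d ∧ d - i < C ∧
          t1 i (d-i) = true ∧ t2 i (d-i) = true)).card ≤ 1 := by
  have hcnt : ∀ d : Nat, ((List.range R).foldl (fun cnt (i : Nat) =>
      let j : Int := (d : Int) - (i : Int)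
      if 0 ≤ j && j < (C : Int) && pvGet2 false (pvMk R C t1) i j.toNat
          && pvGet2 false (pvMk R C t2) i j.toNat
      then cnt + 1 else cnt) (0:Nat))
      = ((Finset.range R).filter (fun i => i ≤ d ∧ d - i < C ∧
          t1 i (d-i) = true ∧ t2 i (d-i) = true)).card := by
    intro d
    rw [show (fun cnt (i : Nat) =>
        let j : Int := (d : Int) - (i : Int)
        if 0 ≤ j && j < (C : Int) && pvGet2 false (pvMk R C t1) i j.toNat
            && pvGet2 false (pvMk R C t2) i j.toNat
        then cnt + 1 else cnt)
      = (fun cnt (i : Nat) =>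
        if (((decide (0 ≤ (d:Int) - (i:Int)) &&
            decide ((d:Int) - (i:Int) < (C:Int))) &&
              pvGet2 false (pvMk R C t1) i ((d:Int) - (i:Int)).toNat) &&
               pvGet2 false (pvMk R C t2) i ((d:Int) - (i:Int)).toNat)
        then cnt + 1 else cnt) from rfl]
    rw [pvFoldCount]
    rw [List.countP_congr (fun i hi => by
      rw [pvPredD_eq R C d t1 t2 i (List.mem_range.mp hi)])]
    rw [pvCount_card]
    simp
  rw [List.any_eq_true]
  constructor
  · rintro ⟨d, hd, h2⟩
    rw [List.mem_range'_1] at hd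
    rw [hcnt d] at h2
    rw [decide_eq_true_eq] at h2
    exact ⟨d, hd.1, by omega, h2⟩
  · rintro ⟨d, hd1, hd2, hcard⟩
    refine ⟨d, List.mem_range'_1.mpr ⟨hd1, by omega⟩, ?_⟩
    rw [hcnt d, decide_eq_true_eq]
    exact hcard

-- ---------- positivity of the counts on all-ones grids (for the D_ region) ----------

theorem pvA1_zero (g : Nat → Nat → Int) : pvA1 g 0 0 = 1 := by
  rw [pvA1_eq]
  unfold pvFA pvInit1
  split <;> simp

theorem pvA1_pos_all (g : Nat → Nat → Int) (R C : Nat)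
    (hall : ∀ i j, i < R → j < C → ¬ (i = 0 ∧ j = 0) → ¬ (i = R-1 ∧ j = C-1) → g i j = 1) :
    ∀ n i j, i + j ≤ n → i < R → j < C → ¬ (i = 0 ∧ j = 0) → ¬ (i = R-1 ∧ j = C-1) →
      0 < pvA1 g i j := by
  intro n
  induction n with
  | zero =>
    intro i j h _ _ h00 _
    exact absurd ⟨by omega, by omega⟩ h00
  | succ n ih =>
    intro i j h hiR hjC h00 hend
    have hg1 : (g i j == 1) = true := by simp [hall i j hiR hjC h00 hend]
    rw [pvA1_expand g i j h00, if_pos hg1]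
    by_cases hi0 : i = 0
    · have hj0 : ¬ j = 0 := fun hj0 => h00 ⟨hi0, hj0⟩
      rw [if_pos hi0, if_neg hj0]
      have hleft : 0 < pvA1 g i (j-1) := by
        by_cases hst : i = 0 ∧ j - 1 = 0
        · rw [hst.1, hst.2, pvA1_zero]; norm_num
        · exact ih i (j-1) (by omega) hiR (by omega) hst (by omega)
      omega
    · rw [if_neg hi0]
      have hup : 0 < pvA1 g (i-1) j := by
        by_cases hst : i - 1 = 0 ∧ j = 0
        · rw [hst.1, hst.2, pvA1_zero]; norm_num
        · exact ih (i-1) j (by omega) (by omega) hjC hst (by omega)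
      have hleft : 0 ≤ (if j = 0 then (0:Int) else pvA1 g i (j-1)) := by
        split
        · exact le_refl 0
        · exact pvA1_nonneg g i (j-1)
      omega

theorem pvA2_pos_all (g : Nat → Nat → Int) (R C : Nat)
    (hall : ∀ i j, i < R → j < C → ¬ (i = 0 ∧ j = 0) → ¬ (i = R-1 ∧ j = C-1) → g i j = 1) :
    ∀ n i j, R - i + (C - j) ≤ n → i < R → j < C → ¬ (i = 0 ∧ j = 0) → ¬ (i = R-1 ∧ j = C-1) →
      0 < pvA2 g R C i j := by
  intro n
  induction n with
  | zero =>
    intro i j h hiR _ _ _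
    omega
  | succ n ih =>
    intro i j h hiR hjC h00 hend
    have hg1 : (g i j == 1) = true := by simp [hall i j hiR hjC h00 hend]
    rw [pvA2_expand g R C i j hend, if_pos hg1]
    by_cases hiR1 : i + 1 < R
    · rw [if_pos hiR1]
      have hup : 0 < pvA2 g R C (i+1) j := by
        by_cases hen : i + 1 = R-1 ∧ j = C-1
        · rw [hen.1, hen.2, pvA2_end g R C (by omega) (by omega)]; norm_num
        · exact ih (i+1) j (by omega) hiR1 hjC (by omega) hen
      have hright : 0 ≤ (if j + 1 < C then pvA2 g R C i (j+1) else (0:Int)) := by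
        split
        · exact pvA2_nonneg g R C i (j+1)
        · exact le_refl 0
      omega
    · have hjC1 : j + 1 < C := by omega
      rw [if_neg hiR1, if_pos hjC1]
      have hright : 0 < pvA2 g R C i (j+1) := by
        by_cases hen : i = R-1 ∧ j + 1 = C-1
        · rw [hen.1, hen.2, pvA2_end g R C (by omega) (by omega)]; norm_num
        · exact ih i (j+1) (by omega) hiR hjC1 (by omega) hen
      omega


-- ---------- the two ports in reduced (pvMk-table) form ----------

theorem pvA_reduced (grid : List (List Int)) (hR : 0 < grid.length)
    (hC : 0 < (grid.getD 0 []).length) :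
    isPossibleToCutPath grid =
      (List.range grid.length).any (fun i => (List.range (grid.getD 0 []).length).any (fun j =>
        ((!(i == 0) || !(j == 0)) &&
          (!(i == grid.length-1) || !(j == (grid.getD 0 []).length-1))) &&
          (pvGet2 0 (pvMk grid.length (grid.getD 0 []).length
              (pvA1 (fun i j => (grid.getD i []).getD j 0))) i j *
            pvGet2 0 (pvMk grid.length (grid.getD 0 []).length
              (pvA2 (fun i j => (grid.getD i []).getD j 0) grid.length
                ((grid.getD 0 []).length))) i j
            == pvA1 (fun i j => (grid.getD i []).getD j 0)
                (grid.length-1) ((grid.getD 0 []).length-1)))) := by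
  unfold isPossibleToCutPath
  dsimp only
  rw [pvDp1_char grid hR hC, pvDp2_char grid hR hC]
  rw [pvGet2_pvMk (0:Int) _ (show grid.length - 1 < grid.length by omega)
    (show (grid.getD 0 []).length - 1 < (grid.getD 0 []).length by omega)]

theorem pvB_reduced (grid : List (List Int)) (hR : 0 < grid.length)
    (hC : 0 < (grid.getD 0 []).length) :
    isPossibleToCutPath_alt grid =
      if 0 < pvA1 (fun i j => (grid.getD i []).getD j 0)
          (grid.length - 1) ((grid.getD 0 []).length - 1) then
        (List.range' 1 (grid.length + (grid.getD 0 []).length - 3)).any (fun d =>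
          ((List.range grid.length).foldl (fun cnt (i : Nat) =>
              let j : Int := (d : Int) - (i : Int)
              if 0 ≤ j && j < ((grid.getD 0 []).length : Int) &&
                  pvGet2 false (pvMk grid.length (grid.getD 0 []).length
                    (pvF1 (fun i j => (grid.getD i []).getD j 0))) i j.toNat &&
                  pvGet2 false (pvMk grid.length (grid.getD 0 []).length
                    (pvB1 (fun i j => (grid.getD i []).getD j 0) grid.length
                      ((grid.getD 0 []).length))) i j.toNat
              then cnt + 1 else cnt) (0:Nat)) ≤ 1)
      else true := by
  unfold isPossibleToCutPath_alt
  dsimp only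
  rw [pvFfwd_char grid hR hC, pvFbwd_char grid hR hC]
  rw [pvGet2_pvMk false _ (show grid.length - 1 < grid.length by omega)
    (show (grid.getD 0 []).length - 1 < (grid.getD 0 []).length by omega)]
  rw [pvF1_decide]
  simp only [decide_eq_true_eq]

-- ===== VERDICT (by name: the statements are the Claim_ definitions above) =====
theorem isPossibleToCutPath_spec : Claim_unchanged_isPossibleToCutPath := by
  unfold Claim_unchanged_isPossibleToCutPath
  intro grid _ hpre
  unfold Spec_isPossibleToCutPath
  intro hnD
  obtain ⟨hne, hC, _⟩ := hpre
  have hR : 0 < grid.length := List.length_pos_iff.mpr hne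
  rw [pvA_reduced grid hR hC, pvB_reduced grid hR hC]
  by_cases hgend : (grid.getD (grid.length - 1) []).getD ((grid.getD 0 []).length - 1) 0 = 1
  · have hg : ((fun i j => (grid.getD i []).getD j 0) (grid.length - 1)
        ((grid.getD 0 []).length - 1) == (1:Int)) = true := by
      simpa using hgend
    by_cases hT : 0 < pvA1 (fun i j => (grid.getD i []).getD j 0)
        (grid.length - 1) ((grid.getD 0 []).length - 1)
    · rw [if_pos hT, Bool.eq_iff_iff, pvScanA_iff, pvScanD_iff]
      have hfilter : ∀ d : Nat, (Finset.range grid.length).filter (fun i =>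
            i ≤ d ∧ d - i < (grid.getD 0 []).length ∧
            pvF1 (fun i j => (grid.getD i []).getD j 0) i (d-i) = true ∧
            pvB1 (fun i j => (grid.getD i []).getD j 0) grid.length
              ((grid.getD 0 []).length) i (d-i) = true)
          = (Finset.range grid.length).filter (fun i =>
            i ≤ d ∧ d - i < (grid.getD 0 []).length ∧
            0 < pvA1 (fun i j => (grid.getD i []).getD j 0) i (d-i) ∧
            0 < pvA2 (fun i j => (grid.getD i []).getD j 0) grid.length
              ((grid.getD 0 []).length) i (d-i)) := by
        intro d
        apply Finset.filter_congr
        intro x _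
        rw [pvF1_decide, pvB1_decide]
        simp
      simp only [hfilter]
      exact pvMasterPos (fun i j => (grid.getD i []).getD j 0)
        grid.length ((grid.getD 0 []).length) (by omega) (by omega) hg
    · rw [if_neg hT]
      have hT0 : pvA1 (fun i j => (grid.getD i []).getD j 0)
          (grid.length - 1) ((grid.getD 0 []).length - 1) = 0 := by
        have := pvA1_nonneg (fun i j => (grid.getD i []).getD j 0)
          (grid.length - 1) ((grid.getD 0 []).length - 1)
        omega
      apply (pvScanA_iff grid.length ((grid.getD 0 []).length) _ _ _).mpr
      obtain ⟨i, hi, j, hj, h1, h2, h3⟩ := pvNoPathScan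
        (fun i j => (grid.getD i []).getD j 0) grid.length ((grid.getD 0 []).length)
        (by omega) (by omega) hg hT0
      exact ⟨i, hi, j, hj, h1, h2, by rw [h3, hT0]⟩
  · by_cases h11 : grid.length = 1 ∧ (grid.getD 0 []).length = 1
    · obtain ⟨e1, e2⟩ := h11
      rw [e1, e2]
      have hpos : 0 < pvA1 (fun i j => (grid.getD i []).getD j 0) (1-1) (1-1) := by
        norm_num [pvA1_zero]
      rw [if_pos hpos]
      simp
    · have hRC2 : 2 ≤ grid.length * (grid.getD 0 []).length := by
        by_cases hR2 : 2 ≤ grid.length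
        · simpa using Nat.mul_le_mul hR2 hC
        · have hR1 : grid.length = 1 := by omega
          have hC2 : 2 ≤ (grid.getD 0 []).length := by
            by_contra hc2
            exact h11 ⟨hR1, by omega⟩
          rw [hR1, one_mul]
          exact hC2
      have hT0 : pvA1 (fun i j => (grid.getD i []).getD j 0)
          (grid.length - 1) ((grid.getD 0 []).length - 1) = 0 := by
        rw [pvA1_expand _ _ _ (by omega : ¬ (grid.length - 1 = 0 ∧ (grid.getD 0 []).length - 1 = 0)),
          if_neg (by simpa using hgend)]
      rw [if_neg (by rw [hT0]; norm_num)]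
      have hex : ∃ i, i < grid.length ∧ ∃ j, j < (grid.getD 0 []).length ∧
          ¬ (i = 0 ∧ j = 0) ∧ ¬ (i = grid.length - 1 ∧ j = (grid.getD 0 []).length - 1) ∧
          (grid.getD i []).getD j 0 ≠ 1 := by
        by_contra hno
        push_neg at hno
        apply hnD
        refine ⟨hne, hC, hRC2, hgend, ?_⟩
        intro i hi j hj h1 h2
        exact hno i hi j hj (fun a b => h1 ⟨a, b⟩) (fun a b => h2 ⟨a, b⟩)
      obtain ⟨i, hi, j, hj, h1, h2, hgij⟩ := hex
      apply (pvScanA_iff grid.length ((grid.getD 0 []).length) _ _ _).mpr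
      refine ⟨i, hi, j, hj, h1, h2, ?_⟩
      have hz : pvA1 (fun i j => (grid.getD i []).getD j 0) i j = 0 := by
        rw [pvA1_expand _ _ _ h1, if_neg (by simpa using hgij)]
      rw [hz, zero_mul, hT0]

theorem isPossibleToCutPath_changed : Claim_changed_isPossibleToCutPath := by
  unfold Claim_changed_isPossibleToCutPath
  decide

theorem isPossibleToCutPath_tight : Claim_exact_isPossibleToCutPath := by
  unfold Claim_exact_isPossibleToCutPath
  intro grid _ hpre hD
  obtain ⟨hne, hC, _⟩ := hpre
  obtain ⟨_, _, hRC2, hgend, hall⟩ := hD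
  have hR : 0 < grid.length := List.length_pos_iff.mpr hne
  rw [pvA_reduced grid hR hC, pvB_reduced grid hR hC]
  have hne2 : ¬ (grid.length - 1 = 0 ∧ (grid.getD 0 []).length - 1 = 0) := by
    rintro ⟨a, b⟩
    have e : grid.length * (grid.getD 0 []).length = 1 := by
      rw [show grid.length = 1 by omega, show (grid.getD 0 []).length = 1 by omega]
    omega
  have hT0 : pvA1 (fun i j => (grid.getD i []).getD j 0)
      (grid.length - 1) ((grid.getD 0 []).length - 1) = 0 := by
    rw [pvA1_expand _ _ _ hne2, if_neg (by simpa using hgend)]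
  rw [if_neg (by rw [hT0]; norm_num)]
  intro hcon
  obtain ⟨i, hi, j, hj, h1, h2, hprod⟩ :=
    (pvScanA_iff grid.length ((grid.getD 0 []).length) _ _ _).mp hcon
  have hall' : ∀ p q, p < grid.length → q < (grid.getD 0 []).length →
      ¬ (p = 0 ∧ q = 0) → ¬ (p = grid.length - 1 ∧ q = (grid.getD 0 []).length - 1) →
      (fun i j => (grid.getD i []).getD j 0) p q = 1 :=
    fun p q hp hq ha hb => hall p hp q hq ha hb
  have p1 : 0 < pvA1 (fun i j => (grid.getD i []).getD j 0) i j :=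
    pvA1_pos_all _ grid.length ((grid.getD 0 []).length) hall' (i+j) i j le_rfl hi hj h1 h2
  have p2 : 0 < pvA2 (fun i j => (grid.getD i []).getD j 0)
      grid.length ((grid.getD 0 []).length) i j :=
    pvA2_pos_all _ grid.length ((grid.getD 0 []).length) hall'
      (grid.length - i + ((grid.getD 0 []).length - j)) i j le_rfl hi hj h1 h2
  have hpos := mul_pos p1 p2
  rw [hT0] at hprod
  omega
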